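/-
  THE PROTECTED FRAME: what the prologue unit `f.P`, the epilogue unit `f.E` and the body segments `f.k` of EVERY protected function of
  EVERY program need (first written in the trees of giflib and lodepng: <Prog>/Spec/FrameCarry.lean; the recipes of a prologue unit and
  of an epilogue unit with their traps: there, and farm.<prog>/hints/protected_frame.md). Every lemma fits ANY `FrameLayout`. NO STATE
  INVARIANT IS CARRIED HERE: a shadow-level function carries `ShadowInv others frames top mem`, a heap-level function `HeapInv H rest
  frames top mem`, and every other fact of an assertion (a program's shape, an array, a vector) goes through the prologue and the
  epilogue by the footprint (`prologue_same`, `storesMem_same`: the inline shadow stores write shadow bytes of the stack only). `top` is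
  always the ENTRY's stack pointer as a number (`(e.reg .rsp).toNat`, the address of the return-address slot, `RA`). `ro`, `ro'` are
  `Fl.raOff` and `Fl.raOff − Fl.size` AS LITERALS: pass `(ro := 88) (ro' := 24)` and `rfl` for `hro`, `hro'` (`<Prog>.Frames.<f>.raOff`
  is not syntactically `88`: with the literal the results match the assertions' text).

  §1  THE INLINE SHADOW STORES AS THE LAYOUT'S `storesMem`                                               namespace ProgX.Carry
      shadow_addr_shift          `b >>> 3 + c = shadowAddr (b.toNat / 8 + k)`      (`c` = the literal `0xC00000 + k`; the index register
                                 as the walker computed it in a PROLOGUE: `b >>> 3`, `b` = the frame's base as a word: `rsp` or `rsp + d`)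
      shadow_addr_index          `g + c = shadowAddr (g.toNat + k)`                (the index register as a word VARIABLE `g` with
                                 bounds: the EPILOGUE's form, no `>>> 3` in the walk's context)
      stores1_shift … stores10_shift
                                 the nest of k stores `(M.writeLE (b >>> 3 + c₁) w₁ v₁)…` = `storesMem M (b.toNat / 8) [⟨k₁, w₁, v₁⟩, …]`
      stores1_index … stores7_index
                                 the same for `(M.writeLE (g + c₁) w₁ v₁)…` = `storesMem M g.toNat […]`
      name_stores1 … name_stores10
                                 from `w_mem : s.mem = <nest over M>`: `∃ M0, M0 = M ∧ s.mem = storesMem M0 (b.toNat / 8) […]`: the memory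
                                 before the shadow stores gets a NAME, its nest of stack stores is never typed (the displacements,
                                 widths and values ARE typed, as the walker prints them: a wrong literal is a `whnf` TIME-OUT of
                                 minutes, not an error message — prefer the next two)
      prologue_stores1 … prologue_stores10
                                 THE FORM TO USE IN A PROLOGUE: the same with NO literal typed — everything is found by unification
                                 with `w_mem` and compared with the layout by `rfl`: `… ∧ s.mem = storesMem M0 (b.toNat / 8) Fl.prologue`
      epilogue_stores1 … epilogue_stores7
                                 THE FORM TO USE IN AN EPILOGUE: `w_mem : s.mem = <nest over v.mem through g>` gives
                                 `s.mem = storesMem v.mem g.toNat Fl.epilogue`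
  §2  READS THROUGH THE SHADOW STORES
      readLE_storesMem           `(storesMem M g0 ss).readLE a k = M.readLE a k` for `a + k ≤ C00000H` (saved registers, the return address)
      rd_storesMem               the same for `rd` (what the postconditions speak of)
      storesMem_same             `Mem.SameExcept [shadowSpan …] M (storesMem M …)` for a frame's stores: any `….sameExcept` lemma of a
                                 program's shapes carries the shape over the stores with it
  §3  THE PROLOGUE
      after_prologue_shadow      THE STEP OF THE SHADOW LAYER: `ShadowInv` with the own frame pushed, for `storesMem M0 ((top − ro) / 8)
                                 Fl.prologue` with `M0` = the entry's memory but for stack stores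
      after_prologue_heap        the same for `HeapInv` (`HeapInv.prologue_ra`, Asan/HeapLemmas.lean: the lift of `ShadowInv.prologue_ra`)
      prologue_same              the footprint: `SameExcept (⟨lo, top⟩ :: shadowSpan (top − ro) (top − ro') :: ws) mem (storesMem M0 …)`
                                 (`ws := []`: `Start.same0`; `ws :=` the contract's windows: `Body.same`)
      prologue_same_rd, prologue_same_readLE
                                 every read at or above the entry's stack pointer (the contract's windows, every argument object, the
                                 return address) is the entry's
  §4  THE EPILOGUE
      (`ShadowInv.frames_above`, `HeapInv.frames_above`, Asan/HeapLemmas.lean: the `hfr` of `after_epilogue_…`, from the ENTRY's invariant)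
      after_epilogue_shadow      THE STEP OF THE SHADOW LAYER: `ShadowInv` for the callers' frames with `top + 8`, for `storesMem mem
                                 ((top − ro) / 8) Fl.epilogue`
      after_epilogue_heap        the same for `HeapInv` (`HeapInv.epilogue_ra`)
      epilogue_same              THE RESTORATION OF `Returned.same`: the frame's shadow span leaves the footprint (its bytes are 0 at
                                 the entry, and 0 again after the epilogue's stores). Shadow level: pass the two `ShadowInv`; heap
                                 level: `henv.heap.inv.shadow` and `hbody.inv.shadow` (the lists of `others` may differ: the heap changed)
      epilogue_untouched         what a SHADOW-LEVEL post `ShadowUntouched e.mem s.mem` needs, from `Body.same` (no window of the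
                                 contract reaches into the shadow)
  §5  THE BODY                                                                                          namespace ProgX
      ShadowPre.callee_frames    `ShadowPre` at a callee's entry for ANY frame list (the own frame in front: from `Body.inv`), when only
                                 windows below the shadow were written since; `ShadowPre.callee_window`: ONE window. Heap level:
                                 `HeapPre.callee_frames_of` / `callee_window_of` (ProgX/Spec/HeapLemmas.lean)
      (`LiveIn.own`, `LiveIn.push`: ProgX/Spec/HeapLemmas.lean; `ShadowInv.sameExcept_low`, `HeapInv.sameExcept_frames`: Asan/HeapLemmas.lean)
  No `sorry`, no axiom, no `bv_decide`, no `native_decide`.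
-/
import ProgX.Words
import ProgX.Spec.HeapLemmas
namespace ProgX.Carry
open X86 X86.User Asan ProgX ProgX.Words

/-! ### 1. The inline shadow stores as the layout's `storesMem` -/

/-- **The address of an inline shadow store in a prologue**: `rbx + (0xC00000 + k)` with `rbx = base >> 3` as the walker computed it
is the shadow address of the granule `base / 8 + k`. `c` is the displacement as the walker folds it (a literal word). -/
theorem shadow_addr_shift (b c : Word) (k : Nat) (hb : b.toNat < 0x800000) (hc : c.toNat = 0xC00000 + k) (hk : k < 0x100000) :
    b >>> 3 + c = shadowAddr (b.toNat / 8 + k) := by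
  apply eq_shadowAddr
  have h3 := Asan.toNat_shr3 b
  rw [UInt64.toNat_add, h3, hc]
  omega

/-- **The address of an inline shadow store in an epilogue**, with the shadow index register as a WORD VARIABLE `g` (bounds only: no
`>>> 3` and no `/ 8` in the walk's context): `g + (0xC00000 + k)` is the shadow address of the granule `g + k`. -/
theorem shadow_addr_index (g c : Word) (k : Nat) (hg : g.toNat < 0x100000) (hc : c.toNat = 0xC00000 + k) (hk : k < 0x100000) :
    g + c = shadowAddr (g.toNat + k) := by
  apply eq_shadowAddr
  rw [UInt64.toNat_add, hc]
  omega

/-- **One inline shadow store** through `b >>> 3`, as the walker writes it: the layout's `storesMem`. -/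
theorem stores1_shift (M : Mem) (b c1 : Word) (k1 w1 v1 : Nat) (hb : b.toNat < 0x800000)
    (h1 : c1.toNat = 0xC00000 + k1) (l1 : k1 < 0x100000) :
    M.writeLE (b >>> 3 + c1) w1 v1 =
      storesMem M (b.toNat / 8) [⟨k1, w1, v1⟩] := by
  rw [shadow_addr_shift b c1 k1 hb h1 l1]
  rfl

/-- **Two inline shadow stores** through `b >>> 3`, as the walker writes them: the layout's `storesMem`. -/
theorem stores2_shift (M : Mem) (b c1 c2 : Word) (k1 w1 v1 k2 w2 v2 : Nat) (hb : b.toNat < 0x800000)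
    (h1 : c1.toNat = 0xC00000 + k1) (l1 : k1 < 0x100000)
    (h2 : c2.toNat = 0xC00000 + k2) (l2 : k2 < 0x100000) :
    (M.writeLE (b >>> 3 + c1) w1 v1).writeLE (b >>> 3 + c2) w2 v2 =
      storesMem M (b.toNat / 8) [⟨k1, w1, v1⟩, ⟨k2, w2, v2⟩] := by
  rw [shadow_addr_shift b c1 k1 hb h1 l1]
  rw [shadow_addr_shift b c2 k2 hb h2 l2]
  rfl

/-- **Three inline shadow stores** through `b >>> 3`, as the walker writes them: the layout's `storesMem`. -/
theorem stores3_shift (M : Mem) (b c1 c2 c3 : Word) (k1 w1 v1 k2 w2 v2 k3 w3 v3 : Nat) (hb : b.toNat < 0x800000)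
    (h1 : c1.toNat = 0xC00000 + k1) (l1 : k1 < 0x100000)
    (h2 : c2.toNat = 0xC00000 + k2) (l2 : k2 < 0x100000)
    (h3 : c3.toNat = 0xC00000 + k3) (l3 : k3 < 0x100000) :
    ((M.writeLE (b >>> 3 + c1) w1 v1).writeLE (b >>> 3 + c2) w2 v2).writeLE (b >>> 3 + c3) w3 v3 =
      storesMem M (b.toNat / 8) [⟨k1, w1, v1⟩, ⟨k2, w2, v2⟩, ⟨k3, w3, v3⟩] := by
  rw [shadow_addr_shift b c1 k1 hb h1 l1]
  rw [shadow_addr_shift b c2 k2 hb h2 l2]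
  rw [shadow_addr_shift b c3 k3 hb h3 l3]
  rfl

/-- **Four inline shadow stores** through `b >>> 3`, as the walker writes them: the layout's `storesMem`. -/
theorem stores4_shift (M : Mem) (b c1 c2 c3 c4 : Word) (k1 w1 v1 k2 w2 v2 k3 w3 v3 k4 w4 v4 : Nat) (hb : b.toNat < 0x800000)
    (h1 : c1.toNat = 0xC00000 + k1) (l1 : k1 < 0x100000)
    (h2 : c2.toNat = 0xC00000 + k2) (l2 : k2 < 0x100000)
    (h3 : c3.toNat = 0xC00000 + k3) (l3 : k3 < 0x100000)
    (h4 : c4.toNat = 0xC00000 + k4) (l4 : k4 < 0x100000) :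
    (((M.writeLE (b >>> 3 + c1) w1 v1).writeLE (b >>> 3 + c2) w2 v2).writeLE (b >>> 3 + c3) w3 v3).writeLE (b >>> 3 + c4)
      w4 v4 =
      storesMem M (b.toNat / 8) [⟨k1, w1, v1⟩, ⟨k2, w2, v2⟩, ⟨k3, w3, v3⟩, ⟨k4, w4, v4⟩] := by
  rw [shadow_addr_shift b c1 k1 hb h1 l1]
  rw [shadow_addr_shift b c2 k2 hb h2 l2]
  rw [shadow_addr_shift b c3 k3 hb h3 l3]
  rw [shadow_addr_shift b c4 k4 hb h4 l4]
  rfl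

/-- **Five inline shadow stores** through `b >>> 3`, as the walker writes them: the layout's `storesMem`. -/
theorem stores5_shift (M : Mem) (b c1 c2 c3 c4 c5 : Word) (k1 w1 v1 k2 w2 v2 k3 w3 v3 k4 w4 v4 k5 w5 v5 : Nat) (hb : b.toNat < 0x800000)
    (h1 : c1.toNat = 0xC00000 + k1) (l1 : k1 < 0x100000)
    (h2 : c2.toNat = 0xC00000 + k2) (l2 : k2 < 0x100000)
    (h3 : c3.toNat = 0xC00000 + k3) (l3 : k3 < 0x100000)
    (h4 : c4.toNat = 0xC00000 + k4) (l4 : k4 < 0x100000)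
    (h5 : c5.toNat = 0xC00000 + k5) (l5 : k5 < 0x100000) :
    ((((M.writeLE (b >>> 3 + c1) w1 v1).writeLE (b >>> 3 + c2) w2 v2).writeLE (b >>> 3 + c3) w3 v3).writeLE (b >>> 3 + c4)
      w4 v4).writeLE (b >>> 3 + c5) w5 v5 =
      storesMem M (b.toNat / 8) [⟨k1, w1, v1⟩, ⟨k2, w2, v2⟩, ⟨k3, w3, v3⟩, ⟨k4, w4, v4⟩, ⟨k5, w5, v5⟩] := by
  rw [shadow_addr_shift b c1 k1 hb h1 l1]
  rw [shadow_addr_shift b c2 k2 hb h2 l2]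
  rw [shadow_addr_shift b c3 k3 hb h3 l3]
  rw [shadow_addr_shift b c4 k4 hb h4 l4]
  rw [shadow_addr_shift b c5 k5 hb h5 l5]
  rfl

/-- **Six inline shadow stores** through `b >>> 3`, as the walker writes them: the layout's `storesMem`. -/
theorem stores6_shift (M : Mem) (b c1 c2 c3 c4 c5 c6 : Word) (k1 w1 v1 k2 w2 v2 k3 w3 v3 k4 w4 v4 k5 w5 v5 k6 w6 v6 : Nat) (hb : b.toNat < 0x800000)
    (h1 : c1.toNat = 0xC00000 + k1) (l1 : k1 < 0x100000)
    (h2 : c2.toNat = 0xC00000 + k2) (l2 : k2 < 0x100000)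
    (h3 : c3.toNat = 0xC00000 + k3) (l3 : k3 < 0x100000)
    (h4 : c4.toNat = 0xC00000 + k4) (l4 : k4 < 0x100000)
    (h5 : c5.toNat = 0xC00000 + k5) (l5 : k5 < 0x100000)
    (h6 : c6.toNat = 0xC00000 + k6) (l6 : k6 < 0x100000) :
    (((((M.writeLE (b >>> 3 + c1) w1 v1).writeLE (b >>> 3 + c2) w2 v2).writeLE (b >>> 3 + c3) w3 v3).writeLE (b >>> 3 +
      c4) w4 v4).writeLE (b >>> 3 + c5) w5 v5).writeLE (b >>> 3 + c6) w6 v6 =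
      storesMem M (b.toNat / 8) [⟨k1, w1, v1⟩, ⟨k2, w2, v2⟩, ⟨k3, w3, v3⟩, ⟨k4, w4, v4⟩, ⟨k5, w5, v5⟩, ⟨k6, w6, v6⟩] := by
  rw [shadow_addr_shift b c1 k1 hb h1 l1]
  rw [shadow_addr_shift b c2 k2 hb h2 l2]
  rw [shadow_addr_shift b c3 k3 hb h3 l3]
  rw [shadow_addr_shift b c4 k4 hb h4 l4]
  rw [shadow_addr_shift b c5 k5 hb h5 l5]
  rw [shadow_addr_shift b c6 k6 hb h6 l6]
  rfl

/-- **Seven inline shadow stores** through `b >>> 3`, as the walker writes them: the layout's `storesMem`. -/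
theorem stores7_shift (M : Mem) (b c1 c2 c3 c4 c5 c6 c7 : Word) (k1 w1 v1 k2 w2 v2 k3 w3 v3 k4 w4 v4 k5 w5 v5 k6 w6 v6 k7 w7 v7 : Nat) (hb : b.toNat < 0x800000)
    (h1 : c1.toNat = 0xC00000 + k1) (l1 : k1 < 0x100000)
    (h2 : c2.toNat = 0xC00000 + k2) (l2 : k2 < 0x100000)
    (h3 : c3.toNat = 0xC00000 + k3) (l3 : k3 < 0x100000)
    (h4 : c4.toNat = 0xC00000 + k4) (l4 : k4 < 0x100000)
    (h5 : c5.toNat = 0xC00000 + k5) (l5 : k5 < 0x100000)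
    (h6 : c6.toNat = 0xC00000 + k6) (l6 : k6 < 0x100000)
    (h7 : c7.toNat = 0xC00000 + k7) (l7 : k7 < 0x100000) :
    ((((((M.writeLE (b >>> 3 + c1) w1 v1).writeLE (b >>> 3 + c2) w2 v2).writeLE (b >>> 3 + c3) w3 v3).writeLE (b >>> 3 +
      c4) w4 v4).writeLE (b >>> 3 + c5) w5 v5).writeLE (b >>> 3 + c6) w6 v6).writeLE (b >>> 3 + c7) w7 v7 =
      storesMem M (b.toNat / 8) [⟨k1, w1, v1⟩, ⟨k2, w2, v2⟩, ⟨k3, w3, v3⟩, ⟨k4, w4, v4⟩, ⟨k5, w5, v5⟩, ⟨k6, w6, v6⟩, ⟨k7,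
        w7, v7⟩] := by
  rw [shadow_addr_shift b c1 k1 hb h1 l1]
  rw [shadow_addr_shift b c2 k2 hb h2 l2]
  rw [shadow_addr_shift b c3 k3 hb h3 l3]
  rw [shadow_addr_shift b c4 k4 hb h4 l4]
  rw [shadow_addr_shift b c5 k5 hb h5 l5]
  rw [shadow_addr_shift b c6 k6 hb h6 l6]
  rw [shadow_addr_shift b c7 k7 hb h7 l7]
  rfl

/-- **Eight inline shadow stores** through `b >>> 3`, as the walker writes them: the layout's `storesMem`. -/
theorem stores8_shift (M : Mem) (b c1 c2 c3 c4 c5 c6 c7 c8 : Word) (k1 w1 v1 k2 w2 v2 k3 w3 v3 k4 w4 v4 k5 w5 v5 k6 w6 v6 k7 w7 v7 k8 w8 v8 : Nat) (hb : b.toNat < 0x800000)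
    (h1 : c1.toNat = 0xC00000 + k1) (l1 : k1 < 0x100000)
    (h2 : c2.toNat = 0xC00000 + k2) (l2 : k2 < 0x100000)
    (h3 : c3.toNat = 0xC00000 + k3) (l3 : k3 < 0x100000)
    (h4 : c4.toNat = 0xC00000 + k4) (l4 : k4 < 0x100000)
    (h5 : c5.toNat = 0xC00000 + k5) (l5 : k5 < 0x100000)
    (h6 : c6.toNat = 0xC00000 + k6) (l6 : k6 < 0x100000)
    (h7 : c7.toNat = 0xC00000 + k7) (l7 : k7 < 0x100000)
    (h8 : c8.toNat = 0xC00000 + k8) (l8 : k8 < 0x100000) :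
    (((((((M.writeLE (b >>> 3 + c1) w1 v1).writeLE (b >>> 3 + c2) w2 v2).writeLE (b >>> 3 + c3) w3 v3).writeLE (b >>> 3 +
      c4) w4 v4).writeLE (b >>> 3 + c5) w5 v5).writeLE (b >>> 3 + c6) w6 v6).writeLE (b >>> 3 + c7) w7 v7).writeLE (b >>> 3
      + c8) w8 v8 =
      storesMem M (b.toNat / 8) [⟨k1, w1, v1⟩, ⟨k2, w2, v2⟩, ⟨k3, w3, v3⟩, ⟨k4, w4, v4⟩, ⟨k5, w5, v5⟩, ⟨k6, w6, v6⟩, ⟨k7,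
        w7, v7⟩, ⟨k8, w8, v8⟩] := by
  rw [shadow_addr_shift b c1 k1 hb h1 l1]
  rw [shadow_addr_shift b c2 k2 hb h2 l2]
  rw [shadow_addr_shift b c3 k3 hb h3 l3]
  rw [shadow_addr_shift b c4 k4 hb h4 l4]
  rw [shadow_addr_shift b c5 k5 hb h5 l5]
  rw [shadow_addr_shift b c6 k6 hb h6 l6]
  rw [shadow_addr_shift b c7 k7 hb h7 l7]
  rw [shadow_addr_shift b c8 k8 hb h8 l8]
  rfl

/-- **Nine inline shadow stores** through `b >>> 3`, as the walker writes them: the layout's `storesMem`. -/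
theorem stores9_shift (M : Mem) (b c1 c2 c3 c4 c5 c6 c7 c8 c9 : Word) (k1 w1 v1 k2 w2 v2 k3 w3 v3 k4 w4 v4 k5 w5 v5 k6 w6 v6 k7 w7 v7 k8 w8 v8 k9 w9 v9 : Nat) (hb : b.toNat < 0x800000)
    (h1 : c1.toNat = 0xC00000 + k1) (l1 : k1 < 0x100000)
    (h2 : c2.toNat = 0xC00000 + k2) (l2 : k2 < 0x100000)
    (h3 : c3.toNat = 0xC00000 + k3) (l3 : k3 < 0x100000)
    (h4 : c4.toNat = 0xC00000 + k4) (l4 : k4 < 0x100000)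
    (h5 : c5.toNat = 0xC00000 + k5) (l5 : k5 < 0x100000)
    (h6 : c6.toNat = 0xC00000 + k6) (l6 : k6 < 0x100000)
    (h7 : c7.toNat = 0xC00000 + k7) (l7 : k7 < 0x100000)
    (h8 : c8.toNat = 0xC00000 + k8) (l8 : k8 < 0x100000)
    (h9 : c9.toNat = 0xC00000 + k9) (l9 : k9 < 0x100000) :
    ((((((((M.writeLE (b >>> 3 + c1) w1 v1).writeLE (b >>> 3 + c2) w2 v2).writeLE (b >>> 3 + c3) w3 v3).writeLE (b >>> 3 +
      c4) w4 v4).writeLE (b >>> 3 + c5) w5 v5).writeLE (b >>> 3 + c6) w6 v6).writeLE (b >>> 3 + c7) w7 v7).writeLE (b >>> 3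
      + c8) w8 v8).writeLE (b >>> 3 + c9) w9 v9 =
      storesMem M (b.toNat / 8) [⟨k1, w1, v1⟩, ⟨k2, w2, v2⟩, ⟨k3, w3, v3⟩, ⟨k4, w4, v4⟩, ⟨k5, w5, v5⟩, ⟨k6, w6, v6⟩, ⟨k7,
        w7, v7⟩, ⟨k8, w8, v8⟩, ⟨k9, w9, v9⟩] := by
  rw [shadow_addr_shift b c1 k1 hb h1 l1]
  rw [shadow_addr_shift b c2 k2 hb h2 l2]
  rw [shadow_addr_shift b c3 k3 hb h3 l3]
  rw [shadow_addr_shift b c4 k4 hb h4 l4]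
  rw [shadow_addr_shift b c5 k5 hb h5 l5]
  rw [shadow_addr_shift b c6 k6 hb h6 l6]
  rw [shadow_addr_shift b c7 k7 hb h7 l7]
  rw [shadow_addr_shift b c8 k8 hb h8 l8]
  rw [shadow_addr_shift b c9 k9 hb h9 l9]
  rfl

/-- **Ten inline shadow stores** through `b >>> 3`, as the walker writes them: the layout's `storesMem`. -/
theorem stores10_shift (M : Mem) (b c1 c2 c3 c4 c5 c6 c7 c8 c9 c10 : Word) (k1 w1 v1 k2 w2 v2 k3 w3 v3 k4 w4 v4 k5 w5 v5 k6 w6 v6 k7 w7 v7 k8 w8 v8 k9 w9 v9 k10 w10 v10 : Nat) (hb : b.toNat < 0x800000)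
    (h1 : c1.toNat = 0xC00000 + k1) (l1 : k1 < 0x100000)
    (h2 : c2.toNat = 0xC00000 + k2) (l2 : k2 < 0x100000)
    (h3 : c3.toNat = 0xC00000 + k3) (l3 : k3 < 0x100000)
    (h4 : c4.toNat = 0xC00000 + k4) (l4 : k4 < 0x100000)
    (h5 : c5.toNat = 0xC00000 + k5) (l5 : k5 < 0x100000)
    (h6 : c6.toNat = 0xC00000 + k6) (l6 : k6 < 0x100000)
    (h7 : c7.toNat = 0xC00000 + k7) (l7 : k7 < 0x100000)
    (h8 : c8.toNat = 0xC00000 + k8) (l8 : k8 < 0x100000)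
    (h9 : c9.toNat = 0xC00000 + k9) (l9 : k9 < 0x100000)
    (h10 : c10.toNat = 0xC00000 + k10) (l10 : k10 < 0x100000) :
    (((((((((M.writeLE (b >>> 3 + c1) w1 v1).writeLE (b >>> 3 + c2) w2 v2).writeLE (b >>> 3 + c3) w3 v3).writeLE (b >>> 3
      + c4) w4 v4).writeLE (b >>> 3 + c5) w5 v5).writeLE (b >>> 3 + c6) w6 v6).writeLE (b >>> 3 + c7) w7 v7).writeLE (b >>>
      3 + c8) w8 v8).writeLE (b >>> 3 + c9) w9 v9).writeLE (b >>> 3 + c10) w10 v10 =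
      storesMem M (b.toNat / 8) [⟨k1, w1, v1⟩, ⟨k2, w2, v2⟩, ⟨k3, w3, v3⟩, ⟨k4, w4, v4⟩, ⟨k5, w5, v5⟩, ⟨k6, w6, v6⟩, ⟨k7,
        w7, v7⟩, ⟨k8, w8, v8⟩, ⟨k9, w9, v9⟩, ⟨k10, w10, v10⟩] := by
  rw [shadow_addr_shift b c1 k1 hb h1 l1]
  rw [shadow_addr_shift b c2 k2 hb h2 l2]
  rw [shadow_addr_shift b c3 k3 hb h3 l3]
  rw [shadow_addr_shift b c4 k4 hb h4 l4]
  rw [shadow_addr_shift b c5 k5 hb h5 l5]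
  rw [shadow_addr_shift b c6 k6 hb h6 l6]
  rw [shadow_addr_shift b c7 k7 hb h7 l7]
  rw [shadow_addr_shift b c8 k8 hb h8 l8]
  rw [shadow_addr_shift b c9 k9 hb h9 l9]
  rw [shadow_addr_shift b c10 k10 hb h10 l10]
  rfl

/-- **One inline shadow store** through the index variable `g` (an epilogue that clears the frame with 1 store). -/
theorem stores1_index (M : Mem) (g c1 : Word) (k1 w1 v1 : Nat) (hg : g.toNat < 0x100000)
    (h1 : c1.toNat = 0xC00000 + k1) (l1 : k1 < 0x100000) :
    M.writeLE (g + c1) w1 v1 =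
      storesMem M g.toNat [⟨k1, w1, v1⟩] := by
  rw [shadow_addr_index g c1 k1 hg h1 l1]
  rfl

/-- **Two inline shadow stores** through the index variable `g` (an epilogue that clears the frame with 2 stores). -/
theorem stores2_index (M : Mem) (g c1 c2 : Word) (k1 w1 v1 k2 w2 v2 : Nat) (hg : g.toNat < 0x100000)
    (h1 : c1.toNat = 0xC00000 + k1) (l1 : k1 < 0x100000)
    (h2 : c2.toNat = 0xC00000 + k2) (l2 : k2 < 0x100000) :
    (M.writeLE (g + c1) w1 v1).writeLE (g + c2) w2 v2 =
      storesMem M g.toNat [⟨k1, w1, v1⟩, ⟨k2, w2, v2⟩] := by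
  rw [shadow_addr_index g c1 k1 hg h1 l1]
  rw [shadow_addr_index g c2 k2 hg h2 l2]
  rfl

/-- **Three inline shadow stores** through the index variable `g` (an epilogue that clears the frame with 3 stores). -/
theorem stores3_index (M : Mem) (g c1 c2 c3 : Word) (k1 w1 v1 k2 w2 v2 k3 w3 v3 : Nat) (hg : g.toNat < 0x100000)
    (h1 : c1.toNat = 0xC00000 + k1) (l1 : k1 < 0x100000)
    (h2 : c2.toNat = 0xC00000 + k2) (l2 : k2 < 0x100000)
    (h3 : c3.toNat = 0xC00000 + k3) (l3 : k3 < 0x100000) :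
    ((M.writeLE (g + c1) w1 v1).writeLE (g + c2) w2 v2).writeLE (g + c3) w3 v3 =
      storesMem M g.toNat [⟨k1, w1, v1⟩, ⟨k2, w2, v2⟩, ⟨k3, w3, v3⟩] := by
  rw [shadow_addr_index g c1 k1 hg h1 l1]
  rw [shadow_addr_index g c2 k2 hg h2 l2]
  rw [shadow_addr_index g c3 k3 hg h3 l3]
  rfl

/-- **Four inline shadow stores** through the index variable `g` (an epilogue that clears the frame with 4 stores). -/
theorem stores4_index (M : Mem) (g c1 c2 c3 c4 : Word) (k1 w1 v1 k2 w2 v2 k3 w3 v3 k4 w4 v4 : Nat) (hg : g.toNat < 0x100000)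
    (h1 : c1.toNat = 0xC00000 + k1) (l1 : k1 < 0x100000)
    (h2 : c2.toNat = 0xC00000 + k2) (l2 : k2 < 0x100000)
    (h3 : c3.toNat = 0xC00000 + k3) (l3 : k3 < 0x100000)
    (h4 : c4.toNat = 0xC00000 + k4) (l4 : k4 < 0x100000) :
    (((M.writeLE (g + c1) w1 v1).writeLE (g + c2) w2 v2).writeLE (g + c3) w3 v3).writeLE (g + c4) w4 v4 =
      storesMem M g.toNat [⟨k1, w1, v1⟩, ⟨k2, w2, v2⟩, ⟨k3, w3, v3⟩, ⟨k4, w4, v4⟩] := by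
  rw [shadow_addr_index g c1 k1 hg h1 l1]
  rw [shadow_addr_index g c2 k2 hg h2 l2]
  rw [shadow_addr_index g c3 k3 hg h3 l3]
  rw [shadow_addr_index g c4 k4 hg h4 l4]
  rfl

/-- **Five inline shadow stores** through the index variable `g` (an epilogue that clears the frame with 5 stores). -/
theorem stores5_index (M : Mem) (g c1 c2 c3 c4 c5 : Word) (k1 w1 v1 k2 w2 v2 k3 w3 v3 k4 w4 v4 k5 w5 v5 : Nat) (hg : g.toNat < 0x100000)
    (h1 : c1.toNat = 0xC00000 + k1) (l1 : k1 < 0x100000)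
    (h2 : c2.toNat = 0xC00000 + k2) (l2 : k2 < 0x100000)
    (h3 : c3.toNat = 0xC00000 + k3) (l3 : k3 < 0x100000)
    (h4 : c4.toNat = 0xC00000 + k4) (l4 : k4 < 0x100000)
    (h5 : c5.toNat = 0xC00000 + k5) (l5 : k5 < 0x100000) :
    ((((M.writeLE (g + c1) w1 v1).writeLE (g + c2) w2 v2).writeLE (g + c3) w3 v3).writeLE (g + c4) w4 v4).writeLE (g + c5)
      w5 v5 =
      storesMem M g.toNat [⟨k1, w1, v1⟩, ⟨k2, w2, v2⟩, ⟨k3, w3, v3⟩, ⟨k4, w4, v4⟩, ⟨k5, w5, v5⟩] := by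
  rw [shadow_addr_index g c1 k1 hg h1 l1]
  rw [shadow_addr_index g c2 k2 hg h2 l2]
  rw [shadow_addr_index g c3 k3 hg h3 l3]
  rw [shadow_addr_index g c4 k4 hg h4 l4]
  rw [shadow_addr_index g c5 k5 hg h5 l5]
  rfl

/-- **Six inline shadow stores** through the index variable `g` (an epilogue that clears the frame with 6 stores). -/
theorem stores6_index (M : Mem) (g c1 c2 c3 c4 c5 c6 : Word) (k1 w1 v1 k2 w2 v2 k3 w3 v3 k4 w4 v4 k5 w5 v5 k6 w6 v6 : Nat) (hg : g.toNat < 0x100000)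
    (h1 : c1.toNat = 0xC00000 + k1) (l1 : k1 < 0x100000)
    (h2 : c2.toNat = 0xC00000 + k2) (l2 : k2 < 0x100000)
    (h3 : c3.toNat = 0xC00000 + k3) (l3 : k3 < 0x100000)
    (h4 : c4.toNat = 0xC00000 + k4) (l4 : k4 < 0x100000)
    (h5 : c5.toNat = 0xC00000 + k5) (l5 : k5 < 0x100000)
    (h6 : c6.toNat = 0xC00000 + k6) (l6 : k6 < 0x100000) :
    (((((M.writeLE (g + c1) w1 v1).writeLE (g + c2) w2 v2).writeLE (g + c3) w3 v3).writeLE (g + c4) w4 v4).writeLE (g +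
      c5) w5 v5).writeLE (g + c6) w6 v6 =
      storesMem M g.toNat [⟨k1, w1, v1⟩, ⟨k2, w2, v2⟩, ⟨k3, w3, v3⟩, ⟨k4, w4, v4⟩, ⟨k5, w5, v5⟩, ⟨k6, w6, v6⟩] := by
  rw [shadow_addr_index g c1 k1 hg h1 l1]
  rw [shadow_addr_index g c2 k2 hg h2 l2]
  rw [shadow_addr_index g c3 k3 hg h3 l3]
  rw [shadow_addr_index g c4 k4 hg h4 l4]
  rw [shadow_addr_index g c5 k5 hg h5 l5]
  rw [shadow_addr_index g c6 k6 hg h6 l6]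
  rfl

/-- **Seven inline shadow stores** through the index variable `g` (an epilogue that clears the frame with 7 stores). -/
theorem stores7_index (M : Mem) (g c1 c2 c3 c4 c5 c6 c7 : Word) (k1 w1 v1 k2 w2 v2 k3 w3 v3 k4 w4 v4 k5 w5 v5 k6 w6 v6 k7 w7 v7 : Nat) (hg : g.toNat < 0x100000)
    (h1 : c1.toNat = 0xC00000 + k1) (l1 : k1 < 0x100000)
    (h2 : c2.toNat = 0xC00000 + k2) (l2 : k2 < 0x100000)
    (h3 : c3.toNat = 0xC00000 + k3) (l3 : k3 < 0x100000)
    (h4 : c4.toNat = 0xC00000 + k4) (l4 : k4 < 0x100000)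
    (h5 : c5.toNat = 0xC00000 + k5) (l5 : k5 < 0x100000)
    (h6 : c6.toNat = 0xC00000 + k6) (l6 : k6 < 0x100000)
    (h7 : c7.toNat = 0xC00000 + k7) (l7 : k7 < 0x100000) :
    ((((((M.writeLE (g + c1) w1 v1).writeLE (g + c2) w2 v2).writeLE (g + c3) w3 v3).writeLE (g + c4) w4 v4).writeLE (g +
      c5) w5 v5).writeLE (g + c6) w6 v6).writeLE (g + c7) w7 v7 =
      storesMem M g.toNat [⟨k1, w1, v1⟩, ⟨k2, w2, v2⟩, ⟨k3, w3, v3⟩, ⟨k4, w4, v4⟩, ⟨k5, w5, v5⟩, ⟨k6, w6, v6⟩, ⟨k7, w7, v7⟩]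
        := by
  rw [shadow_addr_index g c1 k1 hg h1 l1]
  rw [shadow_addr_index g c2 k2 hg h2 l2]
  rw [shadow_addr_index g c3 k3 hg h3 l3]
  rw [shadow_addr_index g c4 k4 hg h4 l4]
  rw [shadow_addr_index g c5 k5 hg h5 l5]
  rw [shadow_addr_index g c6 k6 hg h6 l6]
  rw [shadow_addr_index g c7 k7 hg h7 l7]
  rfl

/-- **The memory before the inline shadow stores gets a NAME** (`M0`, with its defining equation: the nest of the prologue's stack
stores), and the walker's `w_mem` becomes `storesMem M0 …`: one store. `obtain ⟨M0, hM0, hmem⟩ := name_stores1 b c₁ k₁ w₁ v₁ w_mem …`: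
`M` is found by unification, the nest is never typed. -/
theorem name_stores1 {m M : Mem} (b c1 : Word) (k1 w1 v1 : Nat)
    (h : m = M.writeLE (b >>> 3 + c1) w1 v1)
    (hb : b.toNat < 0x800000)
    (h1 : c1.toNat = 0xC00000 + k1) (l1 : k1 < 0x100000) :
    ∃ M0, M0 = M ∧ m = storesMem M0 (b.toNat / 8) [⟨k1, w1, v1⟩] :=
  ⟨M, rfl, h.trans (stores1_shift M b c1 k1 w1 v1 hb h1 l1)⟩

/-- The same for two stores. -/
theorem name_stores2 {m M : Mem} (b c1 c2 : Word) (k1 w1 v1 k2 w2 v2 : Nat)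
    (h : m = (M.writeLE (b >>> 3 + c1) w1 v1).writeLE (b >>> 3 + c2) w2 v2)
    (hb : b.toNat < 0x800000)
    (h1 : c1.toNat = 0xC00000 + k1) (l1 : k1 < 0x100000)
    (h2 : c2.toNat = 0xC00000 + k2) (l2 : k2 < 0x100000) :
    ∃ M0, M0 = M ∧ m = storesMem M0 (b.toNat / 8) [⟨k1, w1, v1⟩, ⟨k2, w2, v2⟩] :=
  ⟨M, rfl, h.trans (stores2_shift M b c1 c2 k1 w1 v1 k2 w2 v2 hb h1 l1 h2 l2)⟩

/-- The same for three stores. -/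
theorem name_stores3 {m M : Mem} (b c1 c2 c3 : Word) (k1 w1 v1 k2 w2 v2 k3 w3 v3 : Nat)
    (h : m = ((M.writeLE (b >>> 3 + c1) w1 v1).writeLE (b >>> 3 + c2) w2 v2).writeLE (b >>> 3 + c3) w3 v3)
    (hb : b.toNat < 0x800000)
    (h1 : c1.toNat = 0xC00000 + k1) (l1 : k1 < 0x100000)
    (h2 : c2.toNat = 0xC00000 + k2) (l2 : k2 < 0x100000)
    (h3 : c3.toNat = 0xC00000 + k3) (l3 : k3 < 0x100000) :
    ∃ M0, M0 = M ∧ m = storesMem M0 (b.toNat / 8) [⟨k1, w1, v1⟩, ⟨k2, w2, v2⟩, ⟨k3, w3, v3⟩] :=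
  ⟨M, rfl, h.trans (stores3_shift M b c1 c2 c3 k1 w1 v1 k2 w2 v2 k3 w3 v3 hb h1 l1 h2 l2 h3 l3)⟩

/-- The same for four stores. -/
theorem name_stores4 {m M : Mem} (b c1 c2 c3 c4 : Word) (k1 w1 v1 k2 w2 v2 k3 w3 v3 k4 w4 v4 : Nat)
    (h : m = (((M.writeLE (b >>> 3 + c1) w1 v1).writeLE (b >>> 3 + c2) w2 v2).writeLE (b >>> 3 + c3) w3 v3).writeLE (b >>>
      3 + c4) w4 v4)
    (hb : b.toNat < 0x800000)
    (h1 : c1.toNat = 0xC00000 + k1) (l1 : k1 < 0x100000)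
    (h2 : c2.toNat = 0xC00000 + k2) (l2 : k2 < 0x100000)
    (h3 : c3.toNat = 0xC00000 + k3) (l3 : k3 < 0x100000)
    (h4 : c4.toNat = 0xC00000 + k4) (l4 : k4 < 0x100000) :
    ∃ M0, M0 = M ∧ m = storesMem M0 (b.toNat / 8) [⟨k1, w1, v1⟩, ⟨k2, w2, v2⟩, ⟨k3, w3, v3⟩, ⟨k4, w4, v4⟩] :=
  ⟨M, rfl, h.trans (stores4_shift M b c1 c2 c3 c4 k1 w1 v1 k2 w2 v2 k3 w3 v3 k4 w4 v4 hb h1 l1 h2 l2 h3 l3 h4 l4)⟩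

/-- The same for five stores. -/
theorem name_stores5 {m M : Mem} (b c1 c2 c3 c4 c5 : Word) (k1 w1 v1 k2 w2 v2 k3 w3 v3 k4 w4 v4 k5 w5 v5 : Nat)
    (h : m = ((((M.writeLE (b >>> 3 + c1) w1 v1).writeLE (b >>> 3 + c2) w2 v2).writeLE (b >>> 3 + c3) w3 v3).writeLE (b
      >>> 3 + c4) w4 v4).writeLE (b >>> 3 + c5) w5 v5)
    (hb : b.toNat < 0x800000)
    (h1 : c1.toNat = 0xC00000 + k1) (l1 : k1 < 0x100000)
    (h2 : c2.toNat = 0xC00000 + k2) (l2 : k2 < 0x100000)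
    (h3 : c3.toNat = 0xC00000 + k3) (l3 : k3 < 0x100000)
    (h4 : c4.toNat = 0xC00000 + k4) (l4 : k4 < 0x100000)
    (h5 : c5.toNat = 0xC00000 + k5) (l5 : k5 < 0x100000) :
    ∃ M0, M0 = M ∧ m = storesMem M0 (b.toNat / 8) [⟨k1, w1, v1⟩, ⟨k2, w2, v2⟩, ⟨k3, w3, v3⟩, ⟨k4, w4, v4⟩, ⟨k5, w5, v5⟩]
      :=
  ⟨M, rfl, h.trans (stores5_shift M b c1 c2 c3 c4 c5 k1 w1 v1 k2 w2 v2 k3 w3 v3 k4 w4 v4 k5 w5 v5 hb h1 l1 h2 l2 h3 l3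
    h4 l4 h5 l5)⟩

/-- The same for six stores. -/
theorem name_stores6 {m M : Mem} (b c1 c2 c3 c4 c5 c6 : Word) (k1 w1 v1 k2 w2 v2 k3 w3 v3 k4 w4 v4 k5 w5 v5 k6 w6 v6 : Nat)
    (h : m = (((((M.writeLE (b >>> 3 + c1) w1 v1).writeLE (b >>> 3 + c2) w2 v2).writeLE (b >>> 3 + c3) w3 v3).writeLE (b
      >>> 3 + c4) w4 v4).writeLE (b >>> 3 + c5) w5 v5).writeLE (b >>> 3 + c6) w6 v6)
    (hb : b.toNat < 0x800000)
    (h1 : c1.toNat = 0xC00000 + k1) (l1 : k1 < 0x100000)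
    (h2 : c2.toNat = 0xC00000 + k2) (l2 : k2 < 0x100000)
    (h3 : c3.toNat = 0xC00000 + k3) (l3 : k3 < 0x100000)
    (h4 : c4.toNat = 0xC00000 + k4) (l4 : k4 < 0x100000)
    (h5 : c5.toNat = 0xC00000 + k5) (l5 : k5 < 0x100000)
    (h6 : c6.toNat = 0xC00000 + k6) (l6 : k6 < 0x100000) :
    ∃ M0, M0 = M ∧ m = storesMem M0 (b.toNat / 8) [⟨k1, w1, v1⟩, ⟨k2, w2, v2⟩, ⟨k3, w3, v3⟩, ⟨k4, w4, v4⟩, ⟨k5, w5, v5⟩,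
      ⟨k6, w6, v6⟩] :=
  ⟨M, rfl, h.trans (stores6_shift M b c1 c2 c3 c4 c5 c6 k1 w1 v1 k2 w2 v2 k3 w3 v3 k4 w4 v4 k5 w5 v5 k6 w6 v6 hb h1 l1
    h2 l2 h3 l3 h4 l4 h5 l5 h6 l6)⟩

/-- The same for seven stores. -/
theorem name_stores7 {m M : Mem} (b c1 c2 c3 c4 c5 c6 c7 : Word) (k1 w1 v1 k2 w2 v2 k3 w3 v3 k4 w4 v4 k5 w5 v5 k6 w6 v6 k7 w7 v7 : Nat)
    (h : m = ((((((M.writeLE (b >>> 3 + c1) w1 v1).writeLE (b >>> 3 + c2) w2 v2).writeLE (b >>> 3 + c3) w3 v3).writeLE (b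
      >>> 3 + c4) w4 v4).writeLE (b >>> 3 + c5) w5 v5).writeLE (b >>> 3 + c6) w6 v6).writeLE (b >>> 3 + c7) w7 v7)
    (hb : b.toNat < 0x800000)
    (h1 : c1.toNat = 0xC00000 + k1) (l1 : k1 < 0x100000)
    (h2 : c2.toNat = 0xC00000 + k2) (l2 : k2 < 0x100000)
    (h3 : c3.toNat = 0xC00000 + k3) (l3 : k3 < 0x100000)
    (h4 : c4.toNat = 0xC00000 + k4) (l4 : k4 < 0x100000)
    (h5 : c5.toNat = 0xC00000 + k5) (l5 : k5 < 0x100000)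
    (h6 : c6.toNat = 0xC00000 + k6) (l6 : k6 < 0x100000)
    (h7 : c7.toNat = 0xC00000 + k7) (l7 : k7 < 0x100000) :
    ∃ M0, M0 = M ∧ m = storesMem M0 (b.toNat / 8) [⟨k1, w1, v1⟩, ⟨k2, w2, v2⟩, ⟨k3, w3, v3⟩, ⟨k4, w4, v4⟩, ⟨k5, w5, v5⟩,
      ⟨k6, w6, v6⟩, ⟨k7, w7, v7⟩] :=
  ⟨M, rfl, h.trans (stores7_shift M b c1 c2 c3 c4 c5 c6 c7 k1 w1 v1 k2 w2 v2 k3 w3 v3 k4 w4 v4 k5 w5 v5 k6 w6 v6 k7 w7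
    v7 hb h1 l1 h2 l2 h3 l3 h4 l4 h5 l5 h6 l6 h7 l7)⟩

/-- The same for eight stores. -/
theorem name_stores8 {m M : Mem} (b c1 c2 c3 c4 c5 c6 c7 c8 : Word) (k1 w1 v1 k2 w2 v2 k3 w3 v3 k4 w4 v4 k5 w5 v5 k6 w6 v6 k7 w7 v7 k8 w8 v8 : Nat)
    (h : m = (((((((M.writeLE (b >>> 3 + c1) w1 v1).writeLE (b >>> 3 + c2) w2 v2).writeLE (b >>> 3 + c3) w3 v3).writeLE (b
      >>> 3 + c4) w4 v4).writeLE (b >>> 3 + c5) w5 v5).writeLE (b >>> 3 + c6) w6 v6).writeLE (b >>> 3 + c7) w7 v7).writeLE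
      (b >>> 3 + c8) w8 v8)
    (hb : b.toNat < 0x800000)
    (h1 : c1.toNat = 0xC00000 + k1) (l1 : k1 < 0x100000)
    (h2 : c2.toNat = 0xC00000 + k2) (l2 : k2 < 0x100000)
    (h3 : c3.toNat = 0xC00000 + k3) (l3 : k3 < 0x100000)
    (h4 : c4.toNat = 0xC00000 + k4) (l4 : k4 < 0x100000)
    (h5 : c5.toNat = 0xC00000 + k5) (l5 : k5 < 0x100000)
    (h6 : c6.toNat = 0xC00000 + k6) (l6 : k6 < 0x100000)
    (h7 : c7.toNat = 0xC00000 + k7) (l7 : k7 < 0x100000)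
    (h8 : c8.toNat = 0xC00000 + k8) (l8 : k8 < 0x100000) :
    ∃ M0, M0 = M ∧ m = storesMem M0 (b.toNat / 8) [⟨k1, w1, v1⟩, ⟨k2, w2, v2⟩, ⟨k3, w3, v3⟩, ⟨k4, w4, v4⟩, ⟨k5, w5, v5⟩,
      ⟨k6, w6, v6⟩, ⟨k7, w7, v7⟩, ⟨k8, w8, v8⟩] :=
  ⟨M, rfl, h.trans (stores8_shift M b c1 c2 c3 c4 c5 c6 c7 c8 k1 w1 v1 k2 w2 v2 k3 w3 v3 k4 w4 v4 k5 w5 v5 k6 w6 v6 k7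
    w7 v7 k8 w8 v8 hb h1 l1 h2 l2 h3 l3 h4 l4 h5 l5 h6 l6 h7 l7 h8 l8)⟩

/-- The same for nine stores. -/
theorem name_stores9 {m M : Mem} (b c1 c2 c3 c4 c5 c6 c7 c8 c9 : Word) (k1 w1 v1 k2 w2 v2 k3 w3 v3 k4 w4 v4 k5 w5 v5 k6 w6 v6 k7 w7 v7 k8 w8 v8 k9 w9 v9 : Nat)
    (h : m = ((((((((M.writeLE (b >>> 3 + c1) w1 v1).writeLE (b >>> 3 + c2) w2 v2).writeLE (b >>> 3 + c3) w3 v3).writeLE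
      (b >>> 3 + c4) w4 v4).writeLE (b >>> 3 + c5) w5 v5).writeLE (b >>> 3 + c6) w6 v6).writeLE (b >>> 3 + c7) w7
      v7).writeLE (b >>> 3 + c8) w8 v8).writeLE (b >>> 3 + c9) w9 v9)
    (hb : b.toNat < 0x800000)
    (h1 : c1.toNat = 0xC00000 + k1) (l1 : k1 < 0x100000)
    (h2 : c2.toNat = 0xC00000 + k2) (l2 : k2 < 0x100000)
    (h3 : c3.toNat = 0xC00000 + k3) (l3 : k3 < 0x100000)
    (h4 : c4.toNat = 0xC00000 + k4) (l4 : k4 < 0x100000)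
    (h5 : c5.toNat = 0xC00000 + k5) (l5 : k5 < 0x100000)
    (h6 : c6.toNat = 0xC00000 + k6) (l6 : k6 < 0x100000)
    (h7 : c7.toNat = 0xC00000 + k7) (l7 : k7 < 0x100000)
    (h8 : c8.toNat = 0xC00000 + k8) (l8 : k8 < 0x100000)
    (h9 : c9.toNat = 0xC00000 + k9) (l9 : k9 < 0x100000) :
    ∃ M0, M0 = M ∧ m = storesMem M0 (b.toNat / 8) [⟨k1, w1, v1⟩, ⟨k2, w2, v2⟩, ⟨k3, w3, v3⟩, ⟨k4, w4, v4⟩, ⟨k5, w5, v5⟩,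
      ⟨k6, w6, v6⟩, ⟨k7, w7, v7⟩, ⟨k8, w8, v8⟩, ⟨k9, w9, v9⟩] :=
  ⟨M, rfl, h.trans (stores9_shift M b c1 c2 c3 c4 c5 c6 c7 c8 c9 k1 w1 v1 k2 w2 v2 k3 w3 v3 k4 w4 v4 k5 w5 v5 k6 w6 v6
    k7 w7 v7 k8 w8 v8 k9 w9 v9 hb h1 l1 h2 l2 h3 l3 h4 l4 h5 l5 h6 l6 h7 l7 h8 l8 h9 l9)⟩

/-- The same for ten stores. -/
theorem name_stores10 {m M : Mem} (b c1 c2 c3 c4 c5 c6 c7 c8 c9 c10 : Word) (k1 w1 v1 k2 w2 v2 k3 w3 v3 k4 w4 v4 k5 w5 v5 k6 w6 v6 k7 w7 v7 k8 w8 v8 k9 w9 v9 k10 w10 v10 : Nat)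
    (h : m = (((((((((M.writeLE (b >>> 3 + c1) w1 v1).writeLE (b >>> 3 + c2) w2 v2).writeLE (b >>> 3 + c3) w3 v3).writeLE
      (b >>> 3 + c4) w4 v4).writeLE (b >>> 3 + c5) w5 v5).writeLE (b >>> 3 + c6) w6 v6).writeLE (b >>> 3 + c7) w7
      v7).writeLE (b >>> 3 + c8) w8 v8).writeLE (b >>> 3 + c9) w9 v9).writeLE (b >>> 3 + c10) w10 v10)
    (hb : b.toNat < 0x800000)
    (h1 : c1.toNat = 0xC00000 + k1) (l1 : k1 < 0x100000)
    (h2 : c2.toNat = 0xC00000 + k2) (l2 : k2 < 0x100000)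
    (h3 : c3.toNat = 0xC00000 + k3) (l3 : k3 < 0x100000)
    (h4 : c4.toNat = 0xC00000 + k4) (l4 : k4 < 0x100000)
    (h5 : c5.toNat = 0xC00000 + k5) (l5 : k5 < 0x100000)
    (h6 : c6.toNat = 0xC00000 + k6) (l6 : k6 < 0x100000)
    (h7 : c7.toNat = 0xC00000 + k7) (l7 : k7 < 0x100000)
    (h8 : c8.toNat = 0xC00000 + k8) (l8 : k8 < 0x100000)
    (h9 : c9.toNat = 0xC00000 + k9) (l9 : k9 < 0x100000)
    (h10 : c10.toNat = 0xC00000 + k10) (l10 : k10 < 0x100000) :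
    ∃ M0, M0 = M ∧ m = storesMem M0 (b.toNat / 8) [⟨k1, w1, v1⟩, ⟨k2, w2, v2⟩, ⟨k3, w3, v3⟩, ⟨k4, w4, v4⟩, ⟨k5, w5, v5⟩,
      ⟨k6, w6, v6⟩, ⟨k7, w7, v7⟩, ⟨k8, w8, v8⟩, ⟨k9, w9, v9⟩, ⟨k10, w10, v10⟩] :=
  ⟨M, rfl, h.trans (stores10_shift M b c1 c2 c3 c4 c5 c6 c7 c8 c9 c10 k1 w1 v1 k2 w2 v2 k3 w3 v3 k4 w4 v4 k5 w5 v5 k6 w6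
    v6 k7 w7 v7 k8 w8 v8 k9 w9 v9 k10 w10 v10 hb h1 l1 h2 l2 h3 l3 h4 l4 h5 l5 h6 l6 h7 l7 h8 l8 h9 l9 h10 l10)⟩

/-- **THE PROLOGUE'S SHADOW STORES, WITHOUT TYPING A LITERAL**: from the walker's `w_mem` (the nest of the prologue's stack stores
`M`, then the inline shadow stores through `b >>> 3`) the memory before the shadow stores gets the NAME `M0` and `w_mem` becomes
`storesMem M0 (b.toNat / 8) Fl.prologue`. Displacements, widths and values are found by unification with `w_mem`; `hl` compares them
with the layout (`by rfl`: closed terms; a mismatch is an immediate error, never a time-out); `r₁ …` by `decide`.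
`obtain ⟨M0, hM0, hmem⟩ := prologue_stores1 <Prog>.Frames.<f> w_mem (by omega) (by rfl) (by decide)`. -/
theorem prologue_stores1 {m M : Mem} {b c1 : Word} {w1 v1 : Nat} (Fl : FrameLayout)
    (h : m = M.writeLE (b >>> 3 + c1) w1 v1)
    (hb : b.toNat < 0x800000)
    (hl : Fl.prologue = [⟨c1.toNat - 0xC00000, w1, v1⟩])
    (r1 : 0xC00000 ≤ c1.toNat ∧ c1.toNat < 0xD00000) :
    ∃ M0, M0 = M ∧ m = storesMem M0 (b.toNat / 8) Fl.prologue := by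
  rw [hl]
  refine name_stores1 b c1 (c1.toNat - 0xC00000) w1 v1 h hb ?_ ?_
  all_goals omega

/-- The same for two stores. -/
theorem prologue_stores2 {m M : Mem} {b c1 c2 : Word} {w1 v1 w2 v2 : Nat} (Fl : FrameLayout)
    (h : m = (M.writeLE (b >>> 3 + c1) w1 v1).writeLE (b >>> 3 + c2) w2 v2)
    (hb : b.toNat < 0x800000)
    (hl : Fl.prologue = [⟨c1.toNat - 0xC00000, w1, v1⟩, ⟨c2.toNat - 0xC00000, w2, v2⟩])
    (r1 : 0xC00000 ≤ c1.toNat ∧ c1.toNat < 0xD00000)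
    (r2 : 0xC00000 ≤ c2.toNat ∧ c2.toNat < 0xD00000) :
    ∃ M0, M0 = M ∧ m = storesMem M0 (b.toNat / 8) Fl.prologue := by
  rw [hl]
  refine name_stores2 b c1 c2 (c1.toNat - 0xC00000) w1 v1 (c2.toNat - 0xC00000) w2 v2 h hb ?_ ?_ ?_ ?_
  all_goals omega

/-- The same for three stores. -/
theorem prologue_stores3 {m M : Mem} {b c1 c2 c3 : Word} {w1 v1 w2 v2 w3 v3 : Nat} (Fl : FrameLayout)
    (h : m = ((M.writeLE (b >>> 3 + c1) w1 v1).writeLE (b >>> 3 + c2) w2 v2).writeLE (b >>> 3 + c3) w3 v3)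
    (hb : b.toNat < 0x800000)
    (hl : Fl.prologue = [⟨c1.toNat - 0xC00000, w1, v1⟩, ⟨c2.toNat - 0xC00000, w2, v2⟩, ⟨c3.toNat - 0xC00000, w3, v3⟩])
    (r1 : 0xC00000 ≤ c1.toNat ∧ c1.toNat < 0xD00000)
    (r2 : 0xC00000 ≤ c2.toNat ∧ c2.toNat < 0xD00000)
    (r3 : 0xC00000 ≤ c3.toNat ∧ c3.toNat < 0xD00000) :
    ∃ M0, M0 = M ∧ m = storesMem M0 (b.toNat / 8) Fl.prologue := by
  rw [hl]
  refine name_stores3 b c1 c2 c3 (c1.toNat - 0xC00000) w1 v1 (c2.toNat - 0xC00000) w2 v2 (c3.toNat - 0xC00000) w3 v3 h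
    hb ?_ ?_ ?_ ?_ ?_ ?_
  all_goals omega

/-- The same for four stores. -/
theorem prologue_stores4 {m M : Mem} {b c1 c2 c3 c4 : Word} {w1 v1 w2 v2 w3 v3 w4 v4 : Nat} (Fl : FrameLayout)
    (h : m = (((M.writeLE (b >>> 3 + c1) w1 v1).writeLE (b >>> 3 + c2) w2 v2).writeLE (b >>> 3 + c3) w3 v3).writeLE (b >>>
      3 + c4) w4 v4)
    (hb : b.toNat < 0x800000)
    (hl : Fl.prologue = [⟨c1.toNat - 0xC00000, w1, v1⟩, ⟨c2.toNat - 0xC00000, w2, v2⟩, ⟨c3.toNat - 0xC00000, w3, v3⟩,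
      ⟨c4.toNat - 0xC00000, w4, v4⟩])
    (r1 : 0xC00000 ≤ c1.toNat ∧ c1.toNat < 0xD00000)
    (r2 : 0xC00000 ≤ c2.toNat ∧ c2.toNat < 0xD00000)
    (r3 : 0xC00000 ≤ c3.toNat ∧ c3.toNat < 0xD00000)
    (r4 : 0xC00000 ≤ c4.toNat ∧ c4.toNat < 0xD00000) :
    ∃ M0, M0 = M ∧ m = storesMem M0 (b.toNat / 8) Fl.prologue := by
  rw [hl]
  refine name_stores4 b c1 c2 c3 c4 (c1.toNat - 0xC00000) w1 v1 (c2.toNat - 0xC00000) w2 v2 (c3.toNat - 0xC00000) w3 v3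
    (c4.toNat - 0xC00000) w4 v4 h hb ?_ ?_ ?_ ?_ ?_ ?_ ?_ ?_
  all_goals omega

/-- The same for five stores. -/
theorem prologue_stores5 {m M : Mem} {b c1 c2 c3 c4 c5 : Word} {w1 v1 w2 v2 w3 v3 w4 v4 w5 v5 : Nat} (Fl : FrameLayout)
    (h : m = ((((M.writeLE (b >>> 3 + c1) w1 v1).writeLE (b >>> 3 + c2) w2 v2).writeLE (b >>> 3 + c3) w3 v3).writeLE (b
      >>> 3 + c4) w4 v4).writeLE (b >>> 3 + c5) w5 v5)
    (hb : b.toNat < 0x800000)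
    (hl : Fl.prologue = [⟨c1.toNat - 0xC00000, w1, v1⟩, ⟨c2.toNat - 0xC00000, w2, v2⟩, ⟨c3.toNat - 0xC00000, w3, v3⟩,
      ⟨c4.toNat - 0xC00000, w4, v4⟩, ⟨c5.toNat - 0xC00000, w5, v5⟩])
    (r1 : 0xC00000 ≤ c1.toNat ∧ c1.toNat < 0xD00000)
    (r2 : 0xC00000 ≤ c2.toNat ∧ c2.toNat < 0xD00000)
    (r3 : 0xC00000 ≤ c3.toNat ∧ c3.toNat < 0xD00000)
    (r4 : 0xC00000 ≤ c4.toNat ∧ c4.toNat < 0xD00000)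
    (r5 : 0xC00000 ≤ c5.toNat ∧ c5.toNat < 0xD00000) :
    ∃ M0, M0 = M ∧ m = storesMem M0 (b.toNat / 8) Fl.prologue := by
  rw [hl]
  refine name_stores5 b c1 c2 c3 c4 c5 (c1.toNat - 0xC00000) w1 v1 (c2.toNat - 0xC00000) w2 v2 (c3.toNat - 0xC00000) w3
    v3 (c4.toNat - 0xC00000) w4 v4 (c5.toNat - 0xC00000) w5 v5 h hb ?_ ?_ ?_ ?_ ?_ ?_ ?_ ?_ ?_ ?_
  all_goals omega

/-- The same for six stores. -/
theorem prologue_stores6 {m M : Mem} {b c1 c2 c3 c4 c5 c6 : Word} {w1 v1 w2 v2 w3 v3 w4 v4 w5 v5 w6 v6 : Nat} (Fl : FrameLayout)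
    (h : m = (((((M.writeLE (b >>> 3 + c1) w1 v1).writeLE (b >>> 3 + c2) w2 v2).writeLE (b >>> 3 + c3) w3 v3).writeLE (b
      >>> 3 + c4) w4 v4).writeLE (b >>> 3 + c5) w5 v5).writeLE (b >>> 3 + c6) w6 v6)
    (hb : b.toNat < 0x800000)
    (hl : Fl.prologue = [⟨c1.toNat - 0xC00000, w1, v1⟩, ⟨c2.toNat - 0xC00000, w2, v2⟩, ⟨c3.toNat - 0xC00000, w3, v3⟩,
      ⟨c4.toNat - 0xC00000, w4, v4⟩, ⟨c5.toNat - 0xC00000, w5, v5⟩, ⟨c6.toNat - 0xC00000, w6, v6⟩])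
    (r1 : 0xC00000 ≤ c1.toNat ∧ c1.toNat < 0xD00000)
    (r2 : 0xC00000 ≤ c2.toNat ∧ c2.toNat < 0xD00000)
    (r3 : 0xC00000 ≤ c3.toNat ∧ c3.toNat < 0xD00000)
    (r4 : 0xC00000 ≤ c4.toNat ∧ c4.toNat < 0xD00000)
    (r5 : 0xC00000 ≤ c5.toNat ∧ c5.toNat < 0xD00000)
    (r6 : 0xC00000 ≤ c6.toNat ∧ c6.toNat < 0xD00000) :
    ∃ M0, M0 = M ∧ m = storesMem M0 (b.toNat / 8) Fl.prologue := by
  rw [hl]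
  refine name_stores6 b c1 c2 c3 c4 c5 c6 (c1.toNat - 0xC00000) w1 v1 (c2.toNat - 0xC00000) w2 v2 (c3.toNat - 0xC00000)
    w3 v3 (c4.toNat - 0xC00000) w4 v4 (c5.toNat - 0xC00000) w5 v5 (c6.toNat - 0xC00000) w6 v6 h hb ?_ ?_ ?_ ?_ ?_ ?_ ?_ ?_
    ?_ ?_ ?_ ?_
  all_goals omega

/-- The same for seven stores. -/
theorem prologue_stores7 {m M : Mem} {b c1 c2 c3 c4 c5 c6 c7 : Word} {w1 v1 w2 v2 w3 v3 w4 v4 w5 v5 w6 v6 w7 v7 : Nat} (Fl : FrameLayout)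
    (h : m = ((((((M.writeLE (b >>> 3 + c1) w1 v1).writeLE (b >>> 3 + c2) w2 v2).writeLE (b >>> 3 + c3) w3 v3).writeLE (b
      >>> 3 + c4) w4 v4).writeLE (b >>> 3 + c5) w5 v5).writeLE (b >>> 3 + c6) w6 v6).writeLE (b >>> 3 + c7) w7 v7)
    (hb : b.toNat < 0x800000)
    (hl : Fl.prologue = [⟨c1.toNat - 0xC00000, w1, v1⟩, ⟨c2.toNat - 0xC00000, w2, v2⟩, ⟨c3.toNat - 0xC00000, w3, v3⟩,
      ⟨c4.toNat - 0xC00000, w4, v4⟩, ⟨c5.toNat - 0xC00000, w5, v5⟩, ⟨c6.toNat - 0xC00000, w6, v6⟩, ⟨c7.toNat - 0xC00000, w7,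
      v7⟩])
    (r1 : 0xC00000 ≤ c1.toNat ∧ c1.toNat < 0xD00000)
    (r2 : 0xC00000 ≤ c2.toNat ∧ c2.toNat < 0xD00000)
    (r3 : 0xC00000 ≤ c3.toNat ∧ c3.toNat < 0xD00000)
    (r4 : 0xC00000 ≤ c4.toNat ∧ c4.toNat < 0xD00000)
    (r5 : 0xC00000 ≤ c5.toNat ∧ c5.toNat < 0xD00000)
    (r6 : 0xC00000 ≤ c6.toNat ∧ c6.toNat < 0xD00000)
    (r7 : 0xC00000 ≤ c7.toNat ∧ c7.toNat < 0xD00000) :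
    ∃ M0, M0 = M ∧ m = storesMem M0 (b.toNat / 8) Fl.prologue := by
  rw [hl]
  refine name_stores7 b c1 c2 c3 c4 c5 c6 c7 (c1.toNat - 0xC00000) w1 v1 (c2.toNat - 0xC00000) w2 v2 (c3.toNat -
    0xC00000) w3 v3 (c4.toNat - 0xC00000) w4 v4 (c5.toNat - 0xC00000) w5 v5 (c6.toNat - 0xC00000) w6 v6 (c7.toNat -
    0xC00000) w7 v7 h hb ?_ ?_ ?_ ?_ ?_ ?_ ?_ ?_ ?_ ?_ ?_ ?_ ?_ ?_
  all_goals omega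

/-- The same for eight stores. -/
theorem prologue_stores8 {m M : Mem} {b c1 c2 c3 c4 c5 c6 c7 c8 : Word} {w1 v1 w2 v2 w3 v3 w4 v4 w5 v5 w6 v6 w7 v7 w8 v8 : Nat} (Fl : FrameLayout)
    (h : m = (((((((M.writeLE (b >>> 3 + c1) w1 v1).writeLE (b >>> 3 + c2) w2 v2).writeLE (b >>> 3 + c3) w3 v3).writeLE (b
      >>> 3 + c4) w4 v4).writeLE (b >>> 3 + c5) w5 v5).writeLE (b >>> 3 + c6) w6 v6).writeLE (b >>> 3 + c7) w7 v7).writeLE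
      (b >>> 3 + c8) w8 v8)
    (hb : b.toNat < 0x800000)
    (hl : Fl.prologue = [⟨c1.toNat - 0xC00000, w1, v1⟩, ⟨c2.toNat - 0xC00000, w2, v2⟩, ⟨c3.toNat - 0xC00000, w3, v3⟩,
      ⟨c4.toNat - 0xC00000, w4, v4⟩, ⟨c5.toNat - 0xC00000, w5, v5⟩, ⟨c6.toNat - 0xC00000, w6, v6⟩, ⟨c7.toNat - 0xC00000, w7,
      v7⟩, ⟨c8.toNat - 0xC00000, w8, v8⟩])
    (r1 : 0xC00000 ≤ c1.toNat ∧ c1.toNat < 0xD00000)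
    (r2 : 0xC00000 ≤ c2.toNat ∧ c2.toNat < 0xD00000)
    (r3 : 0xC00000 ≤ c3.toNat ∧ c3.toNat < 0xD00000)
    (r4 : 0xC00000 ≤ c4.toNat ∧ c4.toNat < 0xD00000)
    (r5 : 0xC00000 ≤ c5.toNat ∧ c5.toNat < 0xD00000)
    (r6 : 0xC00000 ≤ c6.toNat ∧ c6.toNat < 0xD00000)
    (r7 : 0xC00000 ≤ c7.toNat ∧ c7.toNat < 0xD00000)
    (r8 : 0xC00000 ≤ c8.toNat ∧ c8.toNat < 0xD00000) :
    ∃ M0, M0 = M ∧ m = storesMem M0 (b.toNat / 8) Fl.prologue := by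
  rw [hl]
  refine name_stores8 b c1 c2 c3 c4 c5 c6 c7 c8 (c1.toNat - 0xC00000) w1 v1 (c2.toNat - 0xC00000) w2 v2 (c3.toNat -
    0xC00000) w3 v3 (c4.toNat - 0xC00000) w4 v4 (c5.toNat - 0xC00000) w5 v5 (c6.toNat - 0xC00000) w6 v6 (c7.toNat -
    0xC00000) w7 v7 (c8.toNat - 0xC00000) w8 v8 h hb ?_ ?_ ?_ ?_ ?_ ?_ ?_ ?_ ?_ ?_ ?_ ?_ ?_ ?_ ?_ ?_
  all_goals omega

/-- The same for nine stores. -/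
theorem prologue_stores9 {m M : Mem} {b c1 c2 c3 c4 c5 c6 c7 c8 c9 : Word} {w1 v1 w2 v2 w3 v3 w4 v4 w5 v5 w6 v6 w7 v7 w8 v8 w9 v9 : Nat} (Fl : FrameLayout)
    (h : m = ((((((((M.writeLE (b >>> 3 + c1) w1 v1).writeLE (b >>> 3 + c2) w2 v2).writeLE (b >>> 3 + c3) w3 v3).writeLE
      (b >>> 3 + c4) w4 v4).writeLE (b >>> 3 + c5) w5 v5).writeLE (b >>> 3 + c6) w6 v6).writeLE (b >>> 3 + c7) w7
      v7).writeLE (b >>> 3 + c8) w8 v8).writeLE (b >>> 3 + c9) w9 v9)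
    (hb : b.toNat < 0x800000)
    (hl : Fl.prologue = [⟨c1.toNat - 0xC00000, w1, v1⟩, ⟨c2.toNat - 0xC00000, w2, v2⟩, ⟨c3.toNat - 0xC00000, w3, v3⟩,
      ⟨c4.toNat - 0xC00000, w4, v4⟩, ⟨c5.toNat - 0xC00000, w5, v5⟩, ⟨c6.toNat - 0xC00000, w6, v6⟩, ⟨c7.toNat - 0xC00000, w7,
      v7⟩, ⟨c8.toNat - 0xC00000, w8, v8⟩, ⟨c9.toNat - 0xC00000, w9, v9⟩])
    (r1 : 0xC00000 ≤ c1.toNat ∧ c1.toNat < 0xD00000)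
    (r2 : 0xC00000 ≤ c2.toNat ∧ c2.toNat < 0xD00000)
    (r3 : 0xC00000 ≤ c3.toNat ∧ c3.toNat < 0xD00000)
    (r4 : 0xC00000 ≤ c4.toNat ∧ c4.toNat < 0xD00000)
    (r5 : 0xC00000 ≤ c5.toNat ∧ c5.toNat < 0xD00000)
    (r6 : 0xC00000 ≤ c6.toNat ∧ c6.toNat < 0xD00000)
    (r7 : 0xC00000 ≤ c7.toNat ∧ c7.toNat < 0xD00000)
    (r8 : 0xC00000 ≤ c8.toNat ∧ c8.toNat < 0xD00000)
    (r9 : 0xC00000 ≤ c9.toNat ∧ c9.toNat < 0xD00000) :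
    ∃ M0, M0 = M ∧ m = storesMem M0 (b.toNat / 8) Fl.prologue := by
  rw [hl]
  refine name_stores9 b c1 c2 c3 c4 c5 c6 c7 c8 c9 (c1.toNat - 0xC00000) w1 v1 (c2.toNat - 0xC00000) w2 v2 (c3.toNat -
    0xC00000) w3 v3 (c4.toNat - 0xC00000) w4 v4 (c5.toNat - 0xC00000) w5 v5 (c6.toNat - 0xC00000) w6 v6 (c7.toNat -
    0xC00000) w7 v7 (c8.toNat - 0xC00000) w8 v8 (c9.toNat - 0xC00000) w9 v9 h hb ?_ ?_ ?_ ?_ ?_ ?_ ?_ ?_ ?_ ?_ ?_ ?_ ?_ ?_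
    ?_ ?_ ?_ ?_
  all_goals omega

/-- The same for ten stores. -/
theorem prologue_stores10 {m M : Mem} {b c1 c2 c3 c4 c5 c6 c7 c8 c9 c10 : Word} {w1 v1 w2 v2 w3 v3 w4 v4 w5 v5 w6 v6 w7 v7 w8 v8 w9 v9 w10 v10 : Nat} (Fl : FrameLayout)
    (h : m = (((((((((M.writeLE (b >>> 3 + c1) w1 v1).writeLE (b >>> 3 + c2) w2 v2).writeLE (b >>> 3 + c3) w3 v3).writeLE
      (b >>> 3 + c4) w4 v4).writeLE (b >>> 3 + c5) w5 v5).writeLE (b >>> 3 + c6) w6 v6).writeLE (b >>> 3 + c7) w7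
      v7).writeLE (b >>> 3 + c8) w8 v8).writeLE (b >>> 3 + c9) w9 v9).writeLE (b >>> 3 + c10) w10 v10)
    (hb : b.toNat < 0x800000)
    (hl : Fl.prologue = [⟨c1.toNat - 0xC00000, w1, v1⟩, ⟨c2.toNat - 0xC00000, w2, v2⟩, ⟨c3.toNat - 0xC00000, w3, v3⟩,
      ⟨c4.toNat - 0xC00000, w4, v4⟩, ⟨c5.toNat - 0xC00000, w5, v5⟩, ⟨c6.toNat - 0xC00000, w6, v6⟩, ⟨c7.toNat - 0xC00000, w7,
      v7⟩, ⟨c8.toNat - 0xC00000, w8, v8⟩, ⟨c9.toNat - 0xC00000, w9, v9⟩, ⟨c10.toNat - 0xC00000, w10, v10⟩])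
    (r1 : 0xC00000 ≤ c1.toNat ∧ c1.toNat < 0xD00000)
    (r2 : 0xC00000 ≤ c2.toNat ∧ c2.toNat < 0xD00000)
    (r3 : 0xC00000 ≤ c3.toNat ∧ c3.toNat < 0xD00000)
    (r4 : 0xC00000 ≤ c4.toNat ∧ c4.toNat < 0xD00000)
    (r5 : 0xC00000 ≤ c5.toNat ∧ c5.toNat < 0xD00000)
    (r6 : 0xC00000 ≤ c6.toNat ∧ c6.toNat < 0xD00000)
    (r7 : 0xC00000 ≤ c7.toNat ∧ c7.toNat < 0xD00000)
    (r8 : 0xC00000 ≤ c8.toNat ∧ c8.toNat < 0xD00000)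
    (r9 : 0xC00000 ≤ c9.toNat ∧ c9.toNat < 0xD00000)
    (r10 : 0xC00000 ≤ c10.toNat ∧ c10.toNat < 0xD00000) :
    ∃ M0, M0 = M ∧ m = storesMem M0 (b.toNat / 8) Fl.prologue := by
  rw [hl]
  refine name_stores10 b c1 c2 c3 c4 c5 c6 c7 c8 c9 c10 (c1.toNat - 0xC00000) w1 v1 (c2.toNat - 0xC00000) w2 v2
    (c3.toNat - 0xC00000) w3 v3 (c4.toNat - 0xC00000) w4 v4 (c5.toNat - 0xC00000) w5 v5 (c6.toNat - 0xC00000) w6 v6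
    (c7.toNat - 0xC00000) w7 v7 (c8.toNat - 0xC00000) w8 v8 (c9.toNat - 0xC00000) w9 v9 (c10.toNat - 0xC00000) w10 v10 h
    hb ?_ ?_ ?_ ?_ ?_ ?_ ?_ ?_ ?_ ?_ ?_ ?_ ?_ ?_ ?_ ?_ ?_ ?_ ?_ ?_
  all_goals omega

/-- **THE EPILOGUE'S SHADOW STORES, WITHOUT TYPING A LITERAL**: the walker's `w_mem` at the `ret` (the inline shadow stores through the
index VARIABLE `g` over the memory `M` of the epilogue's entry) is `storesMem M g.toNat Fl.epilogue`.
`have hmem := epilogue_stores1 <Prog>.Frames.<f> w_mem (by omega) (by rfl) (by decide)`, then `rw [hbn] at hmem`. -/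
theorem epilogue_stores1 {m M : Mem} {g c1 : Word} {w1 v1 : Nat} (Fl : FrameLayout)
    (h : m = M.writeLE (g + c1) w1 v1)
    (hg : g.toNat < 0x100000)
    (hl : Fl.epilogue = [⟨c1.toNat - 0xC00000, w1, v1⟩])
    (r1 : 0xC00000 ≤ c1.toNat ∧ c1.toNat < 0xD00000) :
    m = storesMem M g.toNat Fl.epilogue := by
  rw [hl, h]
  refine stores1_index M g c1 (c1.toNat - 0xC00000) w1 v1 hg ?_ ?_
  all_goals omega

/-- The same for two stores. -/
theorem epilogue_stores2 {m M : Mem} {g c1 c2 : Word} {w1 v1 w2 v2 : Nat} (Fl : FrameLayout)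
    (h : m = (M.writeLE (g + c1) w1 v1).writeLE (g + c2) w2 v2)
    (hg : g.toNat < 0x100000)
    (hl : Fl.epilogue = [⟨c1.toNat - 0xC00000, w1, v1⟩, ⟨c2.toNat - 0xC00000, w2, v2⟩])
    (r1 : 0xC00000 ≤ c1.toNat ∧ c1.toNat < 0xD00000)
    (r2 : 0xC00000 ≤ c2.toNat ∧ c2.toNat < 0xD00000) :
    m = storesMem M g.toNat Fl.epilogue := by
  rw [hl, h]
  refine stores2_index M g c1 c2 (c1.toNat - 0xC00000) w1 v1 (c2.toNat - 0xC00000) w2 v2 hg ?_ ?_ ?_ ?_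
  all_goals omega

/-- The same for three stores. -/
theorem epilogue_stores3 {m M : Mem} {g c1 c2 c3 : Word} {w1 v1 w2 v2 w3 v3 : Nat} (Fl : FrameLayout)
    (h : m = ((M.writeLE (g + c1) w1 v1).writeLE (g + c2) w2 v2).writeLE (g + c3) w3 v3)
    (hg : g.toNat < 0x100000)
    (hl : Fl.epilogue = [⟨c1.toNat - 0xC00000, w1, v1⟩, ⟨c2.toNat - 0xC00000, w2, v2⟩, ⟨c3.toNat - 0xC00000, w3, v3⟩])
    (r1 : 0xC00000 ≤ c1.toNat ∧ c1.toNat < 0xD00000)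
    (r2 : 0xC00000 ≤ c2.toNat ∧ c2.toNat < 0xD00000)
    (r3 : 0xC00000 ≤ c3.toNat ∧ c3.toNat < 0xD00000) :
    m = storesMem M g.toNat Fl.epilogue := by
  rw [hl, h]
  refine stores3_index M g c1 c2 c3 (c1.toNat - 0xC00000) w1 v1 (c2.toNat - 0xC00000) w2 v2 (c3.toNat - 0xC00000) w3 v3
    hg ?_ ?_ ?_ ?_ ?_ ?_
  all_goals omega

/-- The same for four stores. -/
theorem epilogue_stores4 {m M : Mem} {g c1 c2 c3 c4 : Word} {w1 v1 w2 v2 w3 v3 w4 v4 : Nat} (Fl : FrameLayout)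
    (h : m = (((M.writeLE (g + c1) w1 v1).writeLE (g + c2) w2 v2).writeLE (g + c3) w3 v3).writeLE (g + c4) w4 v4)
    (hg : g.toNat < 0x100000)
    (hl : Fl.epilogue = [⟨c1.toNat - 0xC00000, w1, v1⟩, ⟨c2.toNat - 0xC00000, w2, v2⟩, ⟨c3.toNat - 0xC00000, w3, v3⟩,
      ⟨c4.toNat - 0xC00000, w4, v4⟩])
    (r1 : 0xC00000 ≤ c1.toNat ∧ c1.toNat < 0xD00000)
    (r2 : 0xC00000 ≤ c2.toNat ∧ c2.toNat < 0xD00000)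
    (r3 : 0xC00000 ≤ c3.toNat ∧ c3.toNat < 0xD00000)
    (r4 : 0xC00000 ≤ c4.toNat ∧ c4.toNat < 0xD00000) :
    m = storesMem M g.toNat Fl.epilogue := by
  rw [hl, h]
  refine stores4_index M g c1 c2 c3 c4 (c1.toNat - 0xC00000) w1 v1 (c2.toNat - 0xC00000) w2 v2 (c3.toNat - 0xC00000) w3
    v3 (c4.toNat - 0xC00000) w4 v4 hg ?_ ?_ ?_ ?_ ?_ ?_ ?_ ?_
  all_goals omega

/-- The same for five stores. -/
theorem epilogue_stores5 {m M : Mem} {g c1 c2 c3 c4 c5 : Word} {w1 v1 w2 v2 w3 v3 w4 v4 w5 v5 : Nat} (Fl : FrameLayout)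
    (h : m = ((((M.writeLE (g + c1) w1 v1).writeLE (g + c2) w2 v2).writeLE (g + c3) w3 v3).writeLE (g + c4) w4 v4).writeLE
      (g + c5) w5 v5)
    (hg : g.toNat < 0x100000)
    (hl : Fl.epilogue = [⟨c1.toNat - 0xC00000, w1, v1⟩, ⟨c2.toNat - 0xC00000, w2, v2⟩, ⟨c3.toNat - 0xC00000, w3, v3⟩,
      ⟨c4.toNat - 0xC00000, w4, v4⟩, ⟨c5.toNat - 0xC00000, w5, v5⟩])
    (r1 : 0xC00000 ≤ c1.toNat ∧ c1.toNat < 0xD00000)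
    (r2 : 0xC00000 ≤ c2.toNat ∧ c2.toNat < 0xD00000)
    (r3 : 0xC00000 ≤ c3.toNat ∧ c3.toNat < 0xD00000)
    (r4 : 0xC00000 ≤ c4.toNat ∧ c4.toNat < 0xD00000)
    (r5 : 0xC00000 ≤ c5.toNat ∧ c5.toNat < 0xD00000) :
    m = storesMem M g.toNat Fl.epilogue := by
  rw [hl, h]
  refine stores5_index M g c1 c2 c3 c4 c5 (c1.toNat - 0xC00000) w1 v1 (c2.toNat - 0xC00000) w2 v2 (c3.toNat - 0xC00000)
    w3 v3 (c4.toNat - 0xC00000) w4 v4 (c5.toNat - 0xC00000) w5 v5 hg ?_ ?_ ?_ ?_ ?_ ?_ ?_ ?_ ?_ ?_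
  all_goals omega

/-- The same for six stores. -/
theorem epilogue_stores6 {m M : Mem} {g c1 c2 c3 c4 c5 c6 : Word} {w1 v1 w2 v2 w3 v3 w4 v4 w5 v5 w6 v6 : Nat} (Fl : FrameLayout)
    (h : m = (((((M.writeLE (g + c1) w1 v1).writeLE (g + c2) w2 v2).writeLE (g + c3) w3 v3).writeLE (g + c4) w4
      v4).writeLE (g + c5) w5 v5).writeLE (g + c6) w6 v6)
    (hg : g.toNat < 0x100000)
    (hl : Fl.epilogue = [⟨c1.toNat - 0xC00000, w1, v1⟩, ⟨c2.toNat - 0xC00000, w2, v2⟩, ⟨c3.toNat - 0xC00000, w3, v3⟩,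
      ⟨c4.toNat - 0xC00000, w4, v4⟩, ⟨c5.toNat - 0xC00000, w5, v5⟩, ⟨c6.toNat - 0xC00000, w6, v6⟩])
    (r1 : 0xC00000 ≤ c1.toNat ∧ c1.toNat < 0xD00000)
    (r2 : 0xC00000 ≤ c2.toNat ∧ c2.toNat < 0xD00000)
    (r3 : 0xC00000 ≤ c3.toNat ∧ c3.toNat < 0xD00000)
    (r4 : 0xC00000 ≤ c4.toNat ∧ c4.toNat < 0xD00000)
    (r5 : 0xC00000 ≤ c5.toNat ∧ c5.toNat < 0xD00000)
    (r6 : 0xC00000 ≤ c6.toNat ∧ c6.toNat < 0xD00000) :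
    m = storesMem M g.toNat Fl.epilogue := by
  rw [hl, h]
  refine stores6_index M g c1 c2 c3 c4 c5 c6 (c1.toNat - 0xC00000) w1 v1 (c2.toNat - 0xC00000) w2 v2 (c3.toNat -
    0xC00000) w3 v3 (c4.toNat - 0xC00000) w4 v4 (c5.toNat - 0xC00000) w5 v5 (c6.toNat - 0xC00000) w6 v6 hg ?_ ?_ ?_ ?_ ?_
    ?_ ?_ ?_ ?_ ?_ ?_ ?_
  all_goals omega

/-- The same for seven stores. -/
theorem epilogue_stores7 {m M : Mem} {g c1 c2 c3 c4 c5 c6 c7 : Word} {w1 v1 w2 v2 w3 v3 w4 v4 w5 v5 w6 v6 w7 v7 : Nat} (Fl : FrameLayout)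
    (h : m = ((((((M.writeLE (g + c1) w1 v1).writeLE (g + c2) w2 v2).writeLE (g + c3) w3 v3).writeLE (g + c4) w4
      v4).writeLE (g + c5) w5 v5).writeLE (g + c6) w6 v6).writeLE (g + c7) w7 v7)
    (hg : g.toNat < 0x100000)
    (hl : Fl.epilogue = [⟨c1.toNat - 0xC00000, w1, v1⟩, ⟨c2.toNat - 0xC00000, w2, v2⟩, ⟨c3.toNat - 0xC00000, w3, v3⟩,
      ⟨c4.toNat - 0xC00000, w4, v4⟩, ⟨c5.toNat - 0xC00000, w5, v5⟩, ⟨c6.toNat - 0xC00000, w6, v6⟩, ⟨c7.toNat - 0xC00000, w7,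
      v7⟩])
    (r1 : 0xC00000 ≤ c1.toNat ∧ c1.toNat < 0xD00000)
    (r2 : 0xC00000 ≤ c2.toNat ∧ c2.toNat < 0xD00000)
    (r3 : 0xC00000 ≤ c3.toNat ∧ c3.toNat < 0xD00000)
    (r4 : 0xC00000 ≤ c4.toNat ∧ c4.toNat < 0xD00000)
    (r5 : 0xC00000 ≤ c5.toNat ∧ c5.toNat < 0xD00000)
    (r6 : 0xC00000 ≤ c6.toNat ∧ c6.toNat < 0xD00000)
    (r7 : 0xC00000 ≤ c7.toNat ∧ c7.toNat < 0xD00000) :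
    m = storesMem M g.toNat Fl.epilogue := by
  rw [hl, h]
  refine stores7_index M g c1 c2 c3 c4 c5 c6 c7 (c1.toNat - 0xC00000) w1 v1 (c2.toNat - 0xC00000) w2 v2 (c3.toNat -
    0xC00000) w3 v3 (c4.toNat - 0xC00000) w4 v4 (c5.toNat - 0xC00000) w5 v5 (c6.toNat - 0xC00000) w6 v6 (c7.toNat -
    0xC00000) w7 v7 hg ?_ ?_ ?_ ?_ ?_ ?_ ?_ ?_ ?_ ?_ ?_ ?_ ?_ ?_
  all_goals omega

/-! ### 2. Reads through the shadow stores -/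

/-- **The stores of a frame's prologue or epilogue write shadow bytes of the frame only**: the footprint of `storesMem` as ONE
`shadowSpan` over the frame's area (`n` granules from `g0`). With it every frame lemma of Common.lean §8 (`ArrAt.sameExcept`,
`InfoShape.sameExcept`, `StateShape.sameExcept`, `Consts.sameExcept`) carries its shape over the stores. -/
theorem storesMem_same (M : Mem) (g0 n : Nat) (ss : List ShadowStore) (hin : ∀ s, s ∈ ss → s.idx + s.width ≤ n)
    (hg : g0 + n ≤ 0x200000) : Mem.SameExcept [⟨0xC00000 + g0, 0xC00000 + g0 + n⟩] M (storesMem M g0 ss) :=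
  storesMem_sameExcept M g0 n ss hin hg

/-- **A read below the shadow region goes through the inline shadow stores** (the saved registers, the return address, every
field of the data space). `n` bounds the stores' granules: `hin` by `decide` for a concrete layout, `n := Fl.size / 8`. -/
theorem readLE_storesMem (M : Mem) (g0 n : Nat) (ss : List ShadowStore) (hin : ∀ s, s ∈ ss → s.idx + s.width ≤ n)
    (hg : g0 + n ≤ 0x200000) (a : Word) (k : Nat) (ha : a.toNat + k ≤ 0xC00000) :
    (storesMem M g0 ss).readLE a k = M.readLE a k := by
  apply (storesMem_sameExcept M g0 n ss hin hg).readLE a k (by omega)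
  intro w hw
  have e := List.mem_singleton.mp hw
  rw [e]
  simp only
  omega

/-- The same for a typed read `rd` (what the postconditions speak of). -/
theorem rd_storesMem (M : Mem) (g0 n : Nat) (ss : List ShadowStore) (hin : ∀ s, s ∈ ss → s.idx + s.width ≤ n)
    (hg : g0 + n ≤ 0x200000) (a k : Nat) (ha : a + k ≤ 0xC00000) : rd (storesMem M g0 ss) a k = rd M a k := by
  rw [rd_def, rd_def]
  apply readLE_storesMem M g0 n ss hin hg
  rw [toNat_ofNat_addr a (by omega)]
  exact ha

/-! ### 3. The prologue -/

/-- **THE PROLOGUE STEP OF THE SHADOW LAYER**, for any protected frame `Fl`. `mem` is the memory at the function's entry (`hinv`: the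
precondition's `ShadowPre.inv`: the clean stack ends at `top + 8`), `M0` the memory after the prologue's stack stores (pushes, the
three header words, spills of arguments: anything inside `[lo, top)`), and the prologue's inline shadow stores follow. Then the
shadow layer holds with the own frame pushed and the clean stack ending at `top'` (the body's stack pointer). -/
theorem after_prologue_shadow {others : List Obj} {frames : List (Nat × FrameLayout)} {top lo top' ro : Nat} {mem M0 : Mem}
    {Fl : FrameLayout} (hinv : ShadowInv others frames (top + 8) mem) (hF : Fl.OK) (hro : Fl.raOff = ro) (hra : top % 8 = 0)
    (hs : Mem.SameExcept [⟨lo, top⟩] mem M0) (ht : top' ≤ top - ro) (h8 : top' % 8 = 0) (hlo' : 0x700000 ≤ top') :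
    ShadowInv others ((top - ro, Fl) :: frames) top' (storesMem M0 ((top - ro) / 8) Fl.prologue) := by
  subst hro
  have hhi := hinv.stack.hi
  -- the stack stores: no shadow byte
  have hun : ShadowUntouched mem M0 := by
    apply untouched_of_sameExcept hs
    intro w hw
    have e := List.mem_singleton.mp hw
    rw [e]
    simp only
    omega
  -- the inline shadow stores
  exact (hinv.untouched hun).prologue_ra hF hra ht h8 hlo'

/-- **THE PROLOGUE STEP OF THE HEAP'S INVARIANT**, for any protected frame `Fl`: as `after_prologue_shadow`, for a heap-level
function (`hinv`: the precondition's `HeapPre.inv`); the stack window starts at or above 700000H (`hlo`: from `he_room`). -/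
theorem after_prologue_heap {H : Heap} {rest : List Obj} {frames : List (Nat × FrameLayout)} {top lo top' ro : Nat} {mem M0 : Mem}
    {Fl : FrameLayout} (hinv : HeapInv H rest frames (top + 8) mem) (hF : Fl.OK) (hro : Fl.raOff = ro) (hra : top % 8 = 0)
    (hs : Mem.SameExcept [⟨lo, top⟩] mem M0) (hlo : 0x700000 ≤ lo) (ht : top' ≤ top - ro) (h8 : top' % 8 = 0)
    (hlo' : 0x700000 ≤ top') :
    HeapInv H rest ((top - ro, Fl) :: frames) top' (storesMem M0 ((top - ro) / 8) Fl.prologue) := by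
  subst hro
  have hhi := hinv.shadow.stack.hi
  -- the stack stores: inside the stack region
  have hinv0 : HeapInv H rest frames (top + 8) M0 := by
    apply hinv.sameExcept_frames hs
    intro w hw
    have e := List.mem_singleton.mp hw
    rw [e]
    simp only
    omega
  -- the inline shadow stores
  exact hinv0.prologue_ra hF hra ht h8 hlo'

/-- **The footprint after the prologue**: the stack window and the shadow span of the frame's area `[top − ro, top − ro')`, in
front of any other windows `ws` (`[]` for `Start.same0`; the contract's windows for `Body.same`). -/
theorem prologue_same {top lo ro ro' : Nat} {mem M0 : Mem} {Fl : FrameLayout} (hF : Fl.OK) (hro : Fl.raOff = ro)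
    (hro' : Fl.raOff - Fl.size = ro') (hra : top % 8 = 0)
    (htop : top ≤ 0x800000) (hb : ro ≤ top) (hs : Mem.SameExcept [⟨lo, top⟩] mem M0) (ws : List Span) :
    Mem.SameExcept (⟨lo, top⟩ :: shadowSpan (top - ro) (top - ro') :: ws) mem
      (storesMem M0 ((top - ro) / 8) Fl.prologue) := by
  subst hro
  subst hro'
  obtain ⟨hs8, hpin, _, _, _, _, _, _, hr8, hrs⟩ := hF
  have hg : (top - Fl.raOff) / 8 + Fl.size / 8 ≤ 0x200000 := by omega
  have h2 := storesMem_sameExcept M0 ((top - Fl.raOff) / 8) (Fl.size / 8) Fl.prologue hpin hg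
  intro a ha
  have ha1 := ha ⟨lo, top⟩ List.mem_cons_self
  have ha2 := ha (shadowSpan (top - Fl.raOff) (top - (Fl.raOff - Fl.size))) (List.mem_cons_of_mem _ List.mem_cons_self)
  unfold shadowSpan at ha2
  simp only at ha1 ha2
  have e1 : M0.read a = mem.read a := by
    apply hs a
    intro w hw
    have e := List.mem_singleton.mp hw
    rw [e]
    exact ha1
  have e2 : (storesMem M0 ((top - Fl.raOff) / 8) Fl.prologue).read a = M0.read a := by
    apply h2 a
    intro w hw
    have e := List.mem_singleton.mp hw
    rw [e]
    simp only
    omega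
  rw [e2, e1]

/-- **Behind the prologue every read at or above the entry's stack pointer is the entry's** (the contract's windows, the objects
the arguments point to — an `InFrame` out-pointer lies at or above `top + 8`, a heap object above 800000H: "untouched" starts
from here). -/
theorem prologue_same_rd {lo top b0 b1 : Nat} {mem mem' : Mem}
    (hs : Mem.SameExcept [⟨lo, top⟩, shadowSpan b0 b1] mem mem') (a k : Nat) (h1 : top ≤ a) (h2 : a + k ≤ 0xC00000) :
    rd mem' a k = rd mem a k := by
  apply hs.rd a k (by omega)
  intro w hw
  simp only [List.mem_cons, List.mem_nil_iff, or_false] at hw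
  rcases hw with e | e
  · rw [e]
    right
    exact h1
  · rw [e]
    left
    unfold shadowSpan
    simp only
    omega

/-- The same for the walker's read (the return-address slot: `a = e.reg .rsp`). -/
theorem prologue_same_readLE {lo top b0 b1 : Nat} {mem mem' : Mem}
    (hs : Mem.SameExcept [⟨lo, top⟩, shadowSpan b0 b1] mem mem') (a : Word) (k : Nat) (h1 : top ≤ a.toNat)
    (h2 : a.toNat + k ≤ 0xC00000) : mem'.readLE a k = mem.readLE a k := by
  apply hs.readLE a k (by omega)
  intro w hw
  simp only [List.mem_cons, List.mem_nil_iff, or_false] at hw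
  rcases hw with e | e
  · rw [e]
    right
    exact h1
  · rw [e]
    left
    unfold shadowSpan
    simp only
    omega

/-! ### 4. The epilogue -/

/-- **THE EPILOGUE STEP OF THE SHADOW LAYER**, for any protected frame `Fl`. `mem` is the memory before the epilogue's inline
shadow stores (`Done`'s), `hinv` its invariant with the own frame in front (`Body.inv`). Afterwards the shadow layer holds for the
callers' frames with the clean stack ending at `top + 8` (the stack pointer after the `ret`). -/
theorem after_epilogue_shadow {others : List Obj} {frames : List (Nat × FrameLayout)} {top top' ro : Nat} {mem : Mem}
    {Fl : FrameLayout} (hro : Fl.raOff = ro) (hinv : ShadowInv others ((top - ro, Fl) :: frames) top' mem)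
    (hra : top % 8 = 0) (hhi : top + 8 ≤ 0x800000) (hfr : ∀ bF, bF ∈ frames → top + 8 ≤ bF.1) :
    ShadowInv others frames (top + 8) (storesMem mem ((top - ro) / 8) Fl.epilogue) := by
  subst hro
  exact hinv.epilogue_ra hra hhi hfr

/-- **THE EPILOGUE STEP OF THE HEAP'S INVARIANT**, for any protected frame `Fl` and the PRESENT heap `H` (the one of `Body.inv`). -/
theorem after_epilogue_heap {H : Heap} {rest : List Obj} {frames : List (Nat × FrameLayout)} {top top' ro : Nat} {mem : Mem}
    {Fl : FrameLayout} (hro : Fl.raOff = ro) (hinv : HeapInv H rest ((top - ro, Fl) :: frames) top' mem)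
    (hra : top % 8 = 0) (hhi : top + 8 ≤ 0x800000) (hfr : ∀ bF, bF ∈ frames → top + 8 ≤ bF.1) :
    HeapInv H rest frames (top + 8) (storesMem mem ((top - ro) / 8) Fl.epilogue) := by
  subst hro
  exact hinv.epilogue_ra hra hhi hfr

/-- **THE FRAME'S SHADOW SPAN LEAVES THE FOOTPRINT: the restoration of `Returned.same`.** Between the prologue and the epilogue
the footprint of a protected function has one window more than its contract: the shadow bytes of its frame (`Body.same`). They were
0 at the entry (the stack below `top + 8` is clean: `StackOK.clean`), and the epilogue's stores make them 0 again
(`FrameLayout.epilogue_clean`): so `Returned.same` holds for the contract's footprint. `m0` = the entry's memory with its invariant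
`hinv0`, `m1` = the memory before the epilogue's stores with `hinv1` (`Body.inv`); `w` = the stack window, `ws` = the contract's
windows. The two lists of `others` may differ (heap level: `henv.heap.inv.shadow` speaks of the entry's heap, `hbody.inv.shadow` of
the present one). -/
theorem epilogue_same {others0 others1 : List Obj} {frames : List (Nat × FrameLayout)} {top top' ro ro' : Nat}
    {m0 m1 : Mem} {Fl : FrameLayout} {w : Span} {ws : List Span} (hro : Fl.raOff = ro) (hro' : Fl.raOff - Fl.size = ro')
    (hinv0 : ShadowInv others0 frames (top + 8) m0) (hinv1 : ShadowInv others1 ((top - ro, Fl) :: frames) top' m1)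
    (hra : top % 8 = 0)
    (hsame : Mem.SameExcept (w :: shadowSpan (top - ro) (top - ro') :: ws) m0 m1) :
    Mem.SameExcept (w :: ws) m0 (storesMem m1 ((top - ro) / 8) Fl.epilogue) := by
  subst hro
  subst hro'
  have hact := hinv1.stack.active (top - Fl.raOff, Fl) List.mem_cons_self
  simp only at hact
  obtain ⟨hF, hb8, hb1, hb2, hp⟩ := hact
  have hlo := hinv1.stack.lo
  have hc1 := FrameLayout.epilogue_clean hF hb8 hb2 hp
  have hc0 := hinv0.stack.clean
  obtain ⟨hs8, _, hein, _, _, _, _, _, hr8, hrs⟩ := hF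
  have hg : (top - Fl.raOff) / 8 + Fl.size / 8 ≤ 0x200000 := by omega
  have h2 := storesMem_sameExcept m1 ((top - Fl.raOff) / 8) (Fl.size / 8) Fl.epilogue hein hg
  intro a ha
  by_cases hin : 0xC00000 + (top - Fl.raOff) / 8 ≤ a.toNat ∧ a.toNat < 0xC00000 + (top - Fl.raOff) / 8 + Fl.size / 8
  · -- a shadow byte of the frame: 0 in both memories
    have ea : a = shadowAddr (a.toNat - 0xC00000) := eq_shadowAddr a _ (by omega)
    have z1 := hc1 (a.toNat - 0xC00000) (by omega) (by omega)
    have z0 := hc0 (a.toNat - 0xC00000) (by omega) (by omega)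
    unfold shadowOf at z1 z0
    rw [← ea] at z1 z0
    apply UInt8.toNat_inj.mp
    rw [z1, z0]
  · -- any other byte: neither the epilogue's stores nor the function wrote it
    have e2 : (storesMem m1 ((top - Fl.raOff) / 8) Fl.epilogue).read a = m1.read a := by
      apply h2 a
      intro x hx
      have e := List.mem_singleton.mp hx
      rw [e]
      simp only
      omega
    rw [e2]
    apply hsame a
    intro x hx
    rcases List.mem_cons.mp hx with e | hx'
    · rw [e]
      exact ha w List.mem_cons_self
    · rcases List.mem_cons.mp hx' with e | hx''
      · rw [e]
        unfold shadowSpan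
        simp only
        omega
      · exact ha x (List.mem_cons_of_mem _ hx'')

/-- **NO SHADOW BYTE HAS CHANGED BETWEEN THE ENTRY AND THE RETURN** (the first clause of a SHADOW-LEVEL post: `ShadowUntouched
e.mem s.mem`): the frame's shadow bytes are 0 at the entry — clean stack — and 0 again after the epilogue (`epilogue_same`), and no
other window of `Body.same` reaches into the shadow (`hw`: the stack window and the contract's windows end at or below C00000H;
`by decide`-free: `intro x hx; simp only [List.mem_cons, List.mem_nil_iff, or_false] at hx; rcases hx with rfl | rfl; omega`, or for
a contract without windows `hw` is about the stack window alone). -/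
theorem epilogue_untouched {others0 others1 : List Obj} {frames : List (Nat × FrameLayout)} {top top' ro ro' : Nat}
    {m0 m1 : Mem} {Fl : FrameLayout} {w : Span} {ws : List Span} (hro : Fl.raOff = ro) (hro' : Fl.raOff - Fl.size = ro')
    (hinv0 : ShadowInv others0 frames (top + 8) m0) (hinv1 : ShadowInv others1 ((top - ro, Fl) :: frames) top' m1)
    (hra : top % 8 = 0)
    (hsame : Mem.SameExcept (w :: shadowSpan (top - ro) (top - ro') :: ws) m0 m1)
    (hw : ∀ x, x ∈ w :: ws → x.hi ≤ 0xC00000) :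
    ShadowUntouched m0 (storesMem m1 ((top - ro) / 8) Fl.epilogue) :=
  untouched_of_sameExcept (epilogue_same hro hro' hinv0 hinv1 hra hsame) hw

end ProgX.Carry

namespace ProgX
open X86 X86.User Asan

/-! ### 5. The body -/

/-- **`ShadowPre` AT THE ENTRY OF A CALLEE, GENERAL FORM** (shadow level; heap level: `HeapPre.callee_frames_of`). `hpre` is the
ENTRY's `ShadowPre` (for `offText`), `hinv` the shadow layer at a memory `mem` for ANY frame list `frames'` — a protected function
passes `Body.inv`: the list with its own frame in front, `top` = the body's stack pointer; the callee's entry state `s` differs from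
`mem` by stores in windows below the shadow (the pushed return address, spills, stores into own locals): `hs` by `rw [w_mem];
u_same`. The three last hypotheses: `rw [w_rsp]; u_omega` each. -/
theorem ShadowPre.callee_frames {T : Text} {others : List Obj} {frames frames' : List (Nat × FrameLayout)} {e s : State}
    {top : Nat} {mem : Mem} {ws : List Span} (hpre : ShadowPre T others frames e) (hinv : ShadowInv others frames' top mem)
    (hs : Mem.SameExcept ws mem s.mem) (hw : ∀ w, w ∈ ws → w.hi ≤ 0xC00000)
    (hsp : (s.reg .rsp).toNat + 8 ≤ top) (h8 : (s.reg .rsp).toNat % 8 = 0) (hlo' : 0x700000 ≤ (s.reg .rsp).toNat + 8) :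
    ShadowPre T others frames' s :=
  ⟨(hinv.sameExcept_low hs hw).lower hsp (by omega) hlo', hpre.offText⟩

/-- **`ShadowPre` AT THE ENTRY OF A CALLEE, ONE WINDOW** `[lo, hi)` with `hi ≤ C00000H` (the function's stack from its lowest push up
to its highest own local written since `mem`). -/
theorem ShadowPre.callee_window {T : Text} {others : List Obj} {frames frames' : List (Nat × FrameLayout)} {e s : State}
    {top lo hi : Nat} {mem : Mem} (hpre : ShadowPre T others frames e) (hinv : ShadowInv others frames' top mem)
    (hs : Mem.SameExcept [⟨lo, hi⟩] mem s.mem) (hhi : hi ≤ 0xC00000)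
    (hsp : (s.reg .rsp).toNat + 8 ≤ top) (h8 : (s.reg .rsp).toNat % 8 = 0) (hlo' : 0x700000 ≤ (s.reg .rsp).toNat + 8) :
    ShadowPre T others frames' s := by
  refine ShadowPre.callee_frames hpre hinv hs ?_ hsp h8 hlo'
  intro w hin
  have hw_eq := List.mem_singleton.mp hin
  rw [hw_eq]
  exact hhi

end ProgX
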